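-- pv_equiv track=rewrite | github.com/cutehammond772/problem-solving-archive | 백준/Platinum/1412. 일방통행/일방통행.py | solve
-- ===== SOURCE A (Python) =====
-- from collections import deque
--
-- def analyse(N, matrix):
--   adj = [set() for _ in range(N)]
--   degrees = [0] * N
--
--   for p in range(N - 1):
--     for q in range(p + 1, N):
--       e1, e2 = matrix[p][q], matrix[q][p]
--
--       if e1 == e2 == 'N':
--         continue
--
--       # 확정된 상황이 아니므로, 진입 차수에 반영하지 않는다.
--       if e1 == e2 == 'Y':
--         adj[p].add(q)
--         adj[q].add(p)
--
--       elif e1 == 'Y':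
--         adj[p].add(q)
--         degrees[q] += 1
--
--       elif e2 == 'Y':
--         adj[q].add(p)
--         degrees[p] += 1
--
--   return degrees, adj
--
-- def solve(N, matrix):
--   degrees, adj = analyse(N, matrix)
--   visit = [False] * N
--
--   # 위상 정렬의 시작점이 될 최상위 노드 후보이다.
--   nodes = [x for x in range(N) if not degrees[x]]
--
--   for root in nodes:
--     if visit[root]: continue
--
--     queue = deque([root])
--     visit[root] = True
--
--     while queue:
--       node = queue.popleft()
--
--       for next in adj[node]:
--         # 양방향 간선에 의한 사이클을 방지하기 위해서이다.
--         if visit[next]: continue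
--
--         # 양방향 간선인 경우 차수에 반영되지 않는 점을 고려한다.
--         if node not in adj[next]:
--           degrees[next] -= 1
--
--         if not degrees[next]:
--           visit[next] = True
--           queue.append(next)
--
--   # 모두 방문해야 사이클이 없는 것이다.
--   return visit.count(True) == N
-- ===== SOURCE B (Python) =====
-- def solve(N, matrix):
--     # A node is "safe" iff every single-direction 'Y' predecessor is safe; the answer is
--     # whether all N nodes are safe (i.e. the single-Y digraph is acyclic).  Computed by
--     # saturating a visited array for N rounds instead of a degree-counting BFS.
--     visited = [False] * N
--     for _ in range(N):
--         for v in range(N):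
--             if not visited[v] and all(
--                 visited[u]
--                 for u in range(N)
--                 if u != v and matrix[u][v] == 'Y' and matrix[v][u] != 'Y'
--             ):
--                 visited[v] = True
--     return sum(visited) == N
-- ===== Notes on version B (the rewrite author's own statement) =====
-- stated objective: simpler
-- what changed: Replaces the degree-counting BFS topological sweep (adjacency sets, indegree array, deque) by a short fixpoint saturation: repeatedly mark a node visited once all of its single-direction 'Y' predecessors are visited, N rounds, then check all nodes are marked; bidirectional edges are ignored entirely since they never affect which nodes get visited.
import Mathlib
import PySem

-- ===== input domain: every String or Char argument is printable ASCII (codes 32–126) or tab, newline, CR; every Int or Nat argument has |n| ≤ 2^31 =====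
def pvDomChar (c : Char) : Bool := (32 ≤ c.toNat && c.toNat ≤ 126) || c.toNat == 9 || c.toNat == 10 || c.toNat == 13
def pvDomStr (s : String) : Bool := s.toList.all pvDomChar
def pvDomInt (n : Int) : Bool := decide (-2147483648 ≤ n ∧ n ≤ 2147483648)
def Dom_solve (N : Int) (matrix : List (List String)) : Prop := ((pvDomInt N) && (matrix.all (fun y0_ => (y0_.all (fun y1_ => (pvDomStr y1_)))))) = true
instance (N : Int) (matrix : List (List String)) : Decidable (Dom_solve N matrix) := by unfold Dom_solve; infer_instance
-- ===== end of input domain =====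

-- B replaces A's degree-counting BFS topological sweep by a plain fixpoint saturation over the
-- single-direction-'Y' predecessor relation; both return whether every node gets visited.
-- (A iterates over Python sets only in ways whose final Bool is order-independent; the port
-- iterates them in insertion order.)

-- ===== PORT A =====
-- matrix[i][j] (in range on every access A makes inside Pre_solve; the default is never read there)
def pvCell (matrix : List (List String)) (i j : Int) : String :=
  PySem.List.pyGetD (PySem.List.pyGetD matrix i []) j ""

-- body of the nested pair loop of analyse
def pvAnalysePair (matrix : List (List String)) (st : List (List Int) × List Int)
    (p q : Int) : List (List Int) × List Int :=
  let adj := st.1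
  let degrees := st.2
  let e1 := pvCell matrix p q
  let e2 := pvCell matrix q p
  if e1 = e2 ∧ e2 = "N" then st
  else if e1 = e2 ∧ e2 = "Y" then
    let adj := PySem.List.pySetD adj p (PySem.Set.add (PySem.List.pyGetD adj p []) q)
    let adj := PySem.List.pySetD adj q (PySem.Set.add (PySem.List.pyGetD adj q []) p)
    (adj, degrees)
  else if e1 = "Y" then
    (PySem.List.pySetD adj p (PySem.Set.add (PySem.List.pyGetD adj p []) q),
     PySem.List.pySetD degrees q (PySem.List.pyGetD degrees q 0 + 1))
  else if e2 = "Y" then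
    (PySem.List.pySetD adj q (PySem.Set.add (PySem.List.pyGetD adj q []) p),
     PySem.List.pySetD degrees p (PySem.List.pyGetD degrees p 0 + 1))
  else st

def pvAnalyse (N : Int) (matrix : List (List String)) : List Int × List (List Int) :=
  let adj0 : List (List Int) := (PySem.List.pyRange 0 N 1).map (fun _ => (PySem.Set.empty : PySem.Set Int))
  let degrees0 : List Int := List.replicate N.toNat 0
  let st := (PySem.List.pyRange 0 (N - 1) 1).foldl
      (fun st p => (PySem.List.pyRange (p + 1) N 1).foldl (fun st q => pvAnalysePair matrix st p q) st)
      (adj0, degrees0)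
  (st.2, st.1)

-- body of `for next in adj[node]` inside the BFS while-loop
def pvBfsEdge (adj : List (List Int)) (node : Int)
    (st : List Bool × List Int × List Int) (next : Int) : List Bool × List Int × List Int :=
  let visit := st.1
  let degrees := st.2.1
  let queue := st.2.2
  if PySem.List.pyGetD visit next false then st
  else
    let degrees :=
      if PySem.Set.contains (PySem.List.pyGetD adj next []) node then degrees
      else PySem.List.pySetD degrees next (PySem.List.pyGetD degrees next 0 - 1)
    if PySem.List.pyGetD degrees next 0 = 0 then
      (PySem.List.pySetD visit next true, degrees, queue ++ [next])
    else (visit, degrees, queue)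

-- `while queue:`; fuel bounds the number of pops (each popped node was enqueued while
-- unvisited and marked visited, so N+1 pops can never be exceeded inside Pre_solve)
def pvBfsLoop (adj : List (List Int)) : Nat → List Int → List Bool → List Int → List Bool × List Int
  | _, [], visit, degrees => (visit, degrees)
  | 0, _ :: _, visit, degrees => (visit, degrees)
  | fuel + 1, node :: queue, visit, degrees =>
      let st := (PySem.List.pyGetD adj node []).foldl (pvBfsEdge adj node) (visit, degrees, queue)
      pvBfsLoop adj fuel st.2.2 st.1 st.2.1

def solve (N : Int) (matrix : List (List String)) : Bool :=
  let da := pvAnalyse N matrix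
  let degrees := da.1
  let adj := da.2
  let visit : List Bool := List.replicate N.toNat false
  let nodes := (PySem.List.pyRange 0 N 1).filter (fun x => PySem.List.pyGetD degrees x 0 == 0)
  let fin := nodes.foldl (fun (st : List Bool × List Int) root =>
      if PySem.List.pyGetD st.1 root false then st
      else pvBfsLoop adj (N.toNat + 1) [root] (PySem.List.pySetD st.1 root true) st.2)
    (visit, degrees)
  ((fin.1.count true : Nat) : Int) == N

-- ===== PORT B =====
-- the predecessor generator of Source B: u in range(N) with u != v, matrix[u][v]=='Y', matrix[v][u]!='Y'
def pvPreds (N : Int) (matrix : List (List String)) (v : Int) : List Int :=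
  (PySem.List.pyRange 0 N 1).filter
    (fun u => u != v && pvCell matrix u v == "Y" && !(pvCell matrix v u == "Y"))

-- body of `for v in range(N)` of Source B
def pvBVisit (N : Int) (matrix : List (List String)) (visited : List Bool) (v : Int) : List Bool :=
  if !(PySem.List.pyGetD visited v false)
      && (pvPreds N matrix v).all (fun u => PySem.List.pyGetD visited u false) then
    PySem.List.pySetD visited v true
  else visited

-- one saturation round (`for v in range(N): …`)
def pvBRound (N : Int) (matrix : List (List String)) (visited : List Bool) : List Bool :=
  (PySem.List.pyRange 0 N 1).foldl (pvBVisit N matrix) visited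

def solve_alt (N : Int) (matrix : List (List String)) : Bool :=
  let fin := (PySem.List.pyRange 0 N 1).foldl (fun visited _ => pvBRound N matrix visited)
      (List.replicate N.toNat false)
  ((fin.count true : Nat) : Int) == N

-- ===== PRECONDITION & SPEC =====
-- Exactly the inputs where the Python A returns: every cell matrix[p][q], matrix[q][p] it reads
-- (p < q < N) must exist, otherwise A raises IndexError (row i needs N entries, the last row N-1).
def Pre_solve (N : Int) (matrix : List (List String)) : Prop :=
  N ≤ 1 ∨ (N ≤ (matrix.length : Int) ∧
    ∀ pr ∈ PySem.List.enumerate (matrix.take N.toNat) 0,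
      (if pr.1 = N - 1 then N - 1 else N) ≤ (pr.2.length : Int))
instance (N : Int) (matrix : List (List String)) : Decidable (Pre_solve N matrix) := by
  unfold Pre_solve; infer_instance

def pvWitness_solve : Int × List (List String) := (3, [["N", "Y", "N"], ["N", "N", "Y"], ["N", "N", "N"]])

def Spec_solve (N : Int) (matrix : List (List String)) (out : Bool) : Prop := out = solve_alt N matrix
instance (N : Int) (matrix : List (List String)) (out : Bool) : Decidable (Spec_solve N matrix out) := by
  unfold Spec_solve; infer_instance

-- ===== CLAIM (what is proved, stated in full; the proofs are below) =====
def Claim_equal_solve : Prop := ∀ (N : Int) (matrix : List (List String)),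
  Dom_solve N matrix → Pre_solve N matrix → Spec_solve N matrix (solve N matrix)

-- ===== LEMMAS AND PROOFS =====

-- the safe nodes: every single-direction 'Y' predecessor is safe (the least such set)
inductive pvReach (N : Int) (matrix : List (List String)) : Int → Prop
  | mk : ∀ v, (∀ u ∈ pvPreds N matrix v, pvReach N matrix u) → pvReach N matrix v

-- ---- small generic helpers ----

theorem pvGetD_nonneg {A : Type} (l : List A) (v : Int) (h0 : 0 ≤ v) (d : A) :
    PySem.List.pyGetD l v d = l.getD v.toNat d := PySem.List.pyGetD_of_nonneg l d h0

theorem pvGetD_nat {A : Type} (l : List A) (i : Nat) (d : A) :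
    PySem.List.pyGetD l (i : Int) d = l.getD i d := by
  rw [pvGetD_nonneg _ _ (by exact_mod_cast Nat.zero_le i)]; simp

theorem pvGetD_set_self {A : Type} (l : List A) (v : Int) (h0 : 0 ≤ v) (hlt : v.toNat < l.length)
    (x d : A) : PySem.List.pyGetD (PySem.List.pySetD l v x) v d = x := by
  have hv : v = ((v.toNat : Nat) : Int) := by omega
  rw [hv, PySem.List.pyGetD_pySetD_natCast _ _ _ _ _ hlt]
  simp

theorem pvGetD_set_ne {A : Type} (l : List A) (v w : Int) (h0 : 0 ≤ v) (hlt : v.toNat < l.length)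
    (h0w : 0 ≤ w) (hne : w ≠ v) (x d : A) :
    PySem.List.pyGetD (PySem.List.pySetD l v x) w d = PySem.List.pyGetD l w d := by
  have hv : v = ((v.toNat : Nat) : Int) := by omega
  have hw : w = ((w.toNat : Nat) : Int) := by omega
  rw [hv, hw, PySem.List.pyGetD_pySetD_natCast _ _ _ _ _ hlt]
  have : w.toNat ≠ v.toNat := by omega
  simp [this]

theorem pvCountP_extend {l : List Int} (hl : l.Nodup) {x : Int} (hx : x ∈ l)
    {P Q : Int → Bool} (hsame : ∀ u ∈ l, u ≠ x → P u = Q u)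
    (hP : P x = false) (hQ : Q x = true) : l.countP Q = l.countP P + 1 := by
  induction l with
  | nil => cases hx
  | cons a l ih =>
    have hnd := List.nodup_cons.mp hl
    by_cases hax : a = x
    · subst hax
      have hcong : l.countP P = l.countP Q := List.countP_congr (by
        intro u hu
        rw [hsame u (List.mem_cons_of_mem _ hu) (fun h => hnd.1 (h ▸ hu))])
      simp [List.countP_cons, hP, hQ, hcong]
    · have hmem : x ∈ l := by
        rcases List.mem_cons.mp hx with h | h
        · exact absurd h.symm hax
        · exact h
      have ha : P a = Q a := hsame a List.mem_cons_self hax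
      have hrec := ih hnd.2 hmem (fun u hu hne => hsame u (List.mem_cons_of_mem _ hu) hne)
      simp only [List.countP_cons, hrec, ← ha]
      rcases Bool.eq_false_or_eq_true (P a) with h | h <;> simp [h] <;> omega

theorem pvCountFalse_set (l : List Bool) (n : Nat) (hlt : n < l.length)
    (hf : l.getD n false = false) : (l.set n true).count false + 1 = l.count false := by
  induction l generalizing n with
  | nil => simp at hlt
  | cons a l ih =>
    cases n with
    | zero => simp_all [List.count_cons]
    | succ m =>
      have := ih m (by simpa using hlt) (by simpa using hf)
      simp [List.count_cons, this]
      omega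

theorem pvFoldl_const_iterate {A : Type} (f : A → A) (l : List Int) (a : A) :
    l.foldl (fun x _ => f x) a = f^[l.length] a := by
  induction l generalizing a with
  | nil => rfl
  | cons b l ih => simp [List.foldl_cons, ih, Function.iterate_succ_apply]

-- pointwise order on visit arrays
def pvLe (a b : List Bool) : Prop :=
  ∀ u : Int, PySem.List.pyGetD a u false = true → PySem.List.pyGetD b u false = true

theorem pvLe_refl (a : List Bool) : pvLe a a := fun _ h => h
theorem pvLe_trans {a b c : List Bool} (h1 : pvLe a b) (h2 : pvLe b c) : pvLe a c :=
  fun u h => h2 u (h1 u h)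

theorem pvLe_set_true (l : List Bool) (i : Int) (h0 : 0 ≤ i) :
    pvLe l (PySem.List.pySetD l i true) := by
  intro u hu
  rw [PySem.List.pySetD_of_nonneg _ _ h0]
  simp only [PySem.List.pyGetD, PySem.List.pyGet?, List.length_set] at hu ⊢
  cases hk : PySem.List.pyIdx? l.length u with
  | none => rw [hk] at hu; simp at hu
  | some k =>
    rw [hk] at hu
    simp only [Option.bind_some] at hu ⊢
    rw [List.getElem?_set]
    by_cases hik : i.toNat = k
    · subst hik
      by_cases hlen : i.toNat < l.length
      · simp [hlen]
      · simp [List.getElem?_eq_none (by omega : l.length ≤ i.toNat)] at hu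
    · simp [hik]
      exact hu

theorem pvLe_antisymm {a b : List Bool} (hlen : a.length = b.length)
    (h1 : pvLe a b) (h2 : pvLe b a) : a = b := by
  apply List.ext_getElem hlen
  intro i h1i h2i
  have ga : PySem.List.pyGetD a (i : Int) false = a[i] := by
    rw [pvGetD_nat, List.getD_eq_getElem _ _ h1i]
  have gb : PySem.List.pyGetD b (i : Int) false = b[i] := by
    rw [pvGetD_nat, List.getD_eq_getElem _ _ h2i]
  cases hA : a[i] <;> cases hB : b[i]
  · rfl
  · have := h2 (i : Int) (by rw [gb, hB])
    rw [ga, hA] at this; simp at this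
  · have := h1 (i : Int) (by rw [ga, hA])
    rw [gb, hB] at this; simp at this
  · rfl

theorem pvF2_count : ∀ {a b : List Bool},
    List.Forall₂ (fun x y => x = true → y = true) a b →
    b.count false ≤ a.count false ∧ (a ≠ b → b.count false < a.count false) := by
  intro a b h
  induction h with
  | nil => simp
  | @cons x y l1 l2 hxy htail ih =>
    cases hx : x <;> cases hy : y <;> subst hx <;> subst hy
    · simp only [List.count_cons]
      refine ⟨by simp; omega, ?_⟩
      intro hne
      have : l1 ≠ l2 := by intro h; exact hne (by rw [h])
      have := ih.2 this
      simp; omega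
    · simp only [List.count_cons]
      constructor
      · simp; omega
      · intro _; simp; omega
    · exact absurd (hxy rfl) (by simp)
    · simp only [List.count_cons]
      refine ⟨by simp; omega, ?_⟩
      intro hne
      have : l1 ≠ l2 := by intro h; exact hne (by rw [h])
      have := ih.2 this
      simp; omega

theorem pvLe_count_false_lt {a b : List Bool} (hlen : a.length = b.length)
    (h1 : pvLe a b) (hne : a ≠ b) : b.count false < a.count false := by
  have hf2 : List.Forall₂ (fun x y => x = true → y = true) a b := by
    rw [List.forall₂_iff_get]
    refine ⟨hlen, ?_⟩
    intro i hi1 hi2 hx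
    have ga : PySem.List.pyGetD a (i : Int) false = a.get ⟨i, hi1⟩ := by
      rw [pvGetD_nat, List.getD_eq_getElem _ _ hi1]; simp
    have gb : PySem.List.pyGetD b (i : Int) false = b.get ⟨i, hi2⟩ := by
      rw [pvGetD_nat, List.getD_eq_getElem _ _ hi2]; simp
    have := h1 (i : Int) (by rw [ga, hx])
    rw [gb] at this; exact this
  exact (pvF2_count hf2).2 hne

-- ---- analyse characterisation ----

abbrev pvInDone (done : List (Int × Int)) (u v : Int) : Prop := (min u v, max u v) ∈ done

def pvAInv (N : Int) (matrix : List (List String)) (done : List (Int × Int))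
    (st : List (List Int) × List Int) : Prop :=
  st.1.length = N.toNat ∧ st.2.length = N.toNat ∧
  (∀ m : Int, 0 ≤ m → m < N →
     (PySem.List.pyGetD st.1 m []).Nodup ∧
     (∀ k : Int, k ∈ PySem.List.pyGetD st.1 m [] ↔
        (0 ≤ k ∧ k < N ∧ k ≠ m ∧ pvCell matrix m k = "Y" ∧ pvInDone done m k))) ∧
  (∀ v : Int, 0 ≤ v → v < N →
     PySem.List.pyGetD st.2 v 0 =
       (((pvPreds N matrix v).countP (fun u => decide (pvInDone done u v)) : Nat) : Int))

theorem pvMem_preds {N : Int} {matrix : List (List String)} {v u : Int} :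
    u ∈ pvPreds N matrix v ↔
      (0 ≤ u ∧ u < N ∧ u ≠ v ∧ pvCell matrix u v = "Y" ∧ pvCell matrix v u ≠ "Y") := by
  simp [pvPreds, List.mem_filter, PySem.List.mem_pyRange_one]
  tauto

theorem pvNodup_preds (N : Int) (matrix : List (List String)) (v : Int) :
    (pvPreds N matrix v).Nodup :=
  List.Nodup.filter _ (PySem.List.nodup_pyRange_one 0 N)

theorem pvInDone_append (done : List (Int × Int)) (p q u v : Int) :
    pvInDone (done ++ [(p, q)]) u v ↔ pvInDone done u v ∨ (min u v = p ∧ max u v = q) := by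
  simp [pvInDone, Prod.ext_iff]

theorem pvMinMax_eq {u v p q : Int} (hpq : p < q) :
    (min u v = p ∧ max u v = q) ↔ ((u = p ∧ v = q) ∨ (u = q ∧ v = p)) := by
  rcases le_total u v with hc | hc <;> simp [min_def, max_def, hc] <;> omega

theorem pvDegCongr {N : Int} {matrix : List (List String)} (done : List (Int × Int))
    {p q : Int} (hpq : p < q)
    (hnp : ∀ u v : Int, u ∈ pvPreds N matrix v → ¬((u = p ∧ v = q) ∨ (u = q ∧ v = p))) (v : Int) :
    (pvPreds N matrix v).countP (fun u => decide (pvInDone (done ++ [(p, q)]) u v))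
      = (pvPreds N matrix v).countP (fun u => decide (pvInDone done u v)) := by
  apply List.countP_congr
  intro u hu
  simp only [decide_eq_true_eq, pvInDone_append, pvMinMax_eq hpq]
  have := hnp u v hu
  tauto

theorem pvRowChar_add {N : Int} {matrix : List (List String)} {done : List (Int × Int)}
    {p q : Int} (hpq : p < q) {row : List Int} {a b : Int}
    (hb0 : 0 ≤ b) (hbN : b < N) (hab : b ≠ a) (hcell : pvCell matrix a b = "Y")
    (hpair : (a = p ∧ b = q) ∨ (a = q ∧ b = p))
    (hnd : row.Nodup)
    (hrow : ∀ k : Int, k ∈ row ↔ (0 ≤ k ∧ k < N ∧ k ≠ a ∧ pvCell matrix a k = "Y" ∧ pvInDone done a k)) :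
    (PySem.Set.add row b).Nodup ∧
      (∀ k : Int, k ∈ PySem.Set.add row b ↔
        (0 ≤ k ∧ k < N ∧ k ≠ a ∧ pvCell matrix a k = "Y" ∧ pvInDone (done ++ [(p, q)]) a k)) := by
  refine ⟨PySem.Set.nodup_add _ _ hnd, ?_⟩
  intro k
  rw [PySem.Set.mem_add, hrow, pvInDone_append, pvMinMax_eq hpq]
  constructor
  · rintro (⟨k1, k2, k3, k4, k5⟩ | rfl)
    · exact ⟨k1, k2, k3, k4, Or.inl k5⟩
    · exact ⟨hb0, hbN, hab, hcell, Or.inr (by tauto)⟩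
  · rintro ⟨k1, k2, k3, k4, k5 | k5⟩
    · exact Or.inl ⟨k1, k2, k3, k4, k5⟩
    · right
      rcases k5 with ⟨rfl, rfl⟩ | ⟨rfl, rfl⟩ <;> rcases hpair with ⟨h1, h2⟩ | ⟨h1, h2⟩ <;> omega

theorem pvRowChar_keep {N : Int} {matrix : List (List String)} {done : List (Int × Int)}
    {p q : Int} (hpq : p < q) {row : List Int} {m : Int}
    (hguard : ∀ k : Int, 0 ≤ k → k < N → k ≠ m → pvCell matrix m k = "Y" →
       ¬((m = p ∧ k = q) ∨ (m = q ∧ k = p)))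
    (hrow : ∀ k : Int, k ∈ row ↔ (0 ≤ k ∧ k < N ∧ k ≠ m ∧ pvCell matrix m k = "Y" ∧ pvInDone done m k)) :
    ∀ k : Int, k ∈ row ↔
      (0 ≤ k ∧ k < N ∧ k ≠ m ∧ pvCell matrix m k = "Y" ∧ pvInDone (done ++ [(p, q)]) m k) := by
  intro k
  rw [hrow, pvInDone_append, pvMinMax_eq hpq]
  constructor
  · rintro ⟨k1, k2, k3, k4, k5⟩; exact ⟨k1, k2, k3, k4, Or.inl k5⟩
  · rintro ⟨k1, k2, k3, k4, k5 | k5⟩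
    · exact ⟨k1, k2, k3, k4, k5⟩
    · exact absurd k5 (hguard k k1 k2 k3 k4)

theorem pvAInv_step {N : Int} {matrix : List (List String)} {done : List (Int × Int)}
    {st : List (List Int) × List Int} {p q : Int}
    (hp : 0 ≤ p) (hpq : p < q) (hq : q < N)
    (hnew : (p, q) ∉ done) (h : pvAInv N matrix done st) :
    pvAInv N matrix (done ++ [(p, q)]) (pvAnalysePair matrix st p q) := by
  obtain ⟨hlen1, hlen2, hrows, hdeg⟩ := h
  have hpN : p.toNat < st.1.length := by omega
  have hqN : q.toNat < st.1.length := by omega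
  have hpD : p.toNat < st.2.length := by omega
  have hqD : q.toNat < st.2.length := by omega
  simp only [pvAnalysePair]
  split_ifs with h1 h2 h3 h4
  -- branch 1: both 'N'
  · refine ⟨hlen1, hlen2, ?_, ?_⟩
    · intro m hm0 hmN
      refine ⟨(hrows m hm0 hmN).1, pvRowChar_keep hpq ?_ (hrows m hm0 hmN).2⟩
      intro k _ _ _ hcell hcon
      rcases hcon with ⟨rfl, rfl⟩ | ⟨rfl, rfl⟩
      · rw [h1.1, h1.2] at hcell; exact absurd hcell (by decide)
      · rw [h1.2] at hcell; exact absurd hcell (by decide)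
    · intro v hv0 hvN
      rw [hdeg v hv0 hvN]
      congr 1
      exact (pvDegCongr done hpq (by
        intro u v hu hcon
        rw [pvMem_preds] at hu
        rcases hcon with ⟨rfl, rfl⟩ | ⟨rfl, rfl⟩
        · rw [h1.1, h1.2] at hu; exact absurd hu.2.2.2.1 (by decide)
        · rw [h1.2] at hu; exact absurd hu.2.2.2.1 (by decide)) v).symm
  -- branch 2: both 'Y' (bidirectional edge, degrees untouched)
  · refine ⟨by simp [PySem.List.length_pySetD, hlen1], hlen2, ?_, ?_⟩
    · intro m hm0 hmN
      by_cases hmp : m = p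
      · subst hmp
        have : PySem.List.pyGetD (PySem.List.pySetD
              (PySem.List.pySetD st.1 m (PySem.Set.add (PySem.List.pyGetD st.1 m []) q)) q
              (PySem.Set.add (PySem.List.pyGetD (PySem.List.pySetD st.1 m (PySem.Set.add (PySem.List.pyGetD st.1 m []) q)) q []) m)) m []
            = PySem.Set.add (PySem.List.pyGetD st.1 m []) q := by
          rw [pvGetD_set_ne _ _ _ (by omega) (by simp [PySem.List.length_pySetD]; omega) hm0 (by omega)]
          exact pvGetD_set_self _ _ hp hpN _ _
        rw [this]
        exact pvRowChar_add hpq (by omega) hq (by omega) (h2.1.trans h2.2) (Or.inl ⟨rfl, rfl⟩)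
          (hrows m hm0 hmN).1 (hrows m hm0 hmN).2
      · by_cases hmq : m = q
        · subst hmq
          have : PySem.List.pyGetD (PySem.List.pySetD
                (PySem.List.pySetD st.1 p (PySem.Set.add (PySem.List.pyGetD st.1 p []) m)) m
                (PySem.Set.add (PySem.List.pyGetD (PySem.List.pySetD st.1 p (PySem.Set.add (PySem.List.pyGetD st.1 p []) m)) m []) p)) m []
              = PySem.Set.add (PySem.List.pyGetD st.1 m []) p := by
            rw [pvGetD_set_self _ _ (by omega) (by simp [PySem.List.length_pySetD]; omega),
              pvGetD_set_ne _ _ _ hp hpN hm0 (by omega)]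
          rw [this]
          exact pvRowChar_add hpq hp (by omega) (by omega) h2.2 (Or.inr ⟨rfl, rfl⟩)
            (hrows m hm0 hmN).1 (hrows m hm0 hmN).2
        · have : PySem.List.pyGetD (PySem.List.pySetD
                (PySem.List.pySetD st.1 p (PySem.Set.add (PySem.List.pyGetD st.1 p []) q)) q
                (PySem.Set.add (PySem.List.pyGetD (PySem.List.pySetD st.1 p (PySem.Set.add (PySem.List.pyGetD st.1 p []) q)) q []) p)) m []
              = PySem.List.pyGetD st.1 m [] := by
            rw [pvGetD_set_ne _ _ _ (by omega) (by simp [PySem.List.length_pySetD]; omega) hm0 hmq,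
              pvGetD_set_ne _ _ _ hp hpN hm0 hmp]
          rw [this]
          refine ⟨(hrows m hm0 hmN).1, pvRowChar_keep hpq ?_ (hrows m hm0 hmN).2⟩
          intro k _ _ _ _ hcon
          rcases hcon with ⟨rfl, rfl⟩ | ⟨rfl, rfl⟩ <;> omega
    · intro v hv0 hvN
      rw [hdeg v hv0 hvN]
      congr 1
      exact (pvDegCongr done hpq (by
        intro u v hu hcon
        rw [pvMem_preds] at hu
        rcases hcon with ⟨rfl, rfl⟩ | ⟨rfl, rfl⟩
        · exact hu.2.2.2.2 h2.2
        · exact hu.2.2.2.2 (h2.1.trans h2.2)) v).symm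
  -- branch 3: single edge p -> q
  · have he2 : pvCell matrix q p ≠ "Y" := by
      intro hc; exact h2 ⟨h3.trans hc.symm, hc⟩
    refine ⟨by simp [PySem.List.length_pySetD, hlen1], by simp [PySem.List.length_pySetD, hlen2], ?_, ?_⟩
    · intro m hm0 hmN
      by_cases hmp : m = p
      · subst hmp
        rw [pvGetD_set_self _ _ hm0 hpN]
        exact pvRowChar_add hpq (by omega) hq (by omega) h3 (Or.inl ⟨rfl, rfl⟩)
          (hrows m hm0 hmN).1 (hrows m hm0 hmN).2
      · rw [pvGetD_set_ne _ _ _ hp hpN hm0 hmp]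
        refine ⟨(hrows m hm0 hmN).1, pvRowChar_keep hpq ?_ (hrows m hm0 hmN).2⟩
        intro k _ _ _ hcell hcon
        rcases hcon with ⟨rfl, rfl⟩ | ⟨rfl, rfl⟩
        · exact hmp rfl
        · exact he2 hcell
    · intro v hv0 hvN
      by_cases hvq : v = q
      · subst hvq
        rw [pvGetD_set_self _ _ (by omega) hqD, hdeg v (by omega) (by omega)]
        have hpe : p ∈ pvPreds N matrix v := pvMem_preds.mpr ⟨hp, by omega, by omega, h3, he2⟩
        have hcnt := pvCountP_extend (pvNodup_preds N matrix v) hpe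
          (P := fun u => decide (pvInDone done u v))
          (Q := fun u => decide (pvInDone (done ++ [(p, v)]) u v))
          (by
            intro u hu hne
            rw [decide_eq_decide]
            rw [pvInDone_append, pvMinMax_eq hpq]
            have : ¬((u = p ∧ v = v) ∨ (u = v ∧ v = p)) := by
              rw [pvMem_preds] at hu
              rintro (⟨rfl, _⟩ | ⟨rfl, rfl⟩)
              · exact hne rfl
              · omega
            tauto)
          (by
            have hmin : min p v = p := min_eq_left (le_of_lt hpq)
            have hmax : max p v = v := max_eq_right (le_of_lt hpq)
            exact decide_eq_false (by simpa [pvInDone, hmin, hmax] using hnew))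
          (by
            have hmin : min p v = p := min_eq_left (le_of_lt hpq)
            have hmax : max p v = v := max_eq_right (le_of_lt hpq)
            exact decide_eq_true (by simp [pvInDone, hmin, hmax]))
        rw [hcnt]; push_cast; ring
      · rw [pvGetD_set_ne _ _ _ (by omega) hqD hv0 hvq, hdeg v hv0 hvN]
        congr 1
        apply (List.countP_congr ?_).symm
        intro u hu
        simp only [decide_eq_true_eq, pvInDone_append, pvMinMax_eq hpq]
        have : ¬((u = p ∧ v = q) ∨ (u = q ∧ v = p)) := by
          rw [pvMem_preds] at hu
          rintro (⟨rfl, rfl⟩ | ⟨rfl, rfl⟩)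
          · exact hvq rfl
          · exact hu.2.2.2.2 h3
        tauto
  -- branch 4: single edge q -> p
  · have he1 : pvCell matrix p q ≠ "Y" := h3
    refine ⟨by simp [PySem.List.length_pySetD, hlen1], by simp [PySem.List.length_pySetD, hlen2], ?_, ?_⟩
    · intro m hm0 hmN
      by_cases hmq : m = q
      · subst hmq
        rw [pvGetD_set_self _ _ hm0 hqN]
        exact pvRowChar_add hpq hp (by omega) (by omega) h4 (Or.inr ⟨rfl, rfl⟩)
          (hrows m hm0 hmN).1 (hrows m hm0 hmN).2
      · rw [pvGetD_set_ne _ _ _ (by omega) hqN hm0 hmq]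
        refine ⟨(hrows m hm0 hmN).1, pvRowChar_keep hpq ?_ (hrows m hm0 hmN).2⟩
        intro k _ _ _ hcell hcon
        rcases hcon with ⟨rfl, rfl⟩ | ⟨rfl, rfl⟩
        · exact he1 hcell
        · exact hmq rfl
    · intro v hv0 hvN
      by_cases hvp : v = p
      · subst hvp
        rw [pvGetD_set_self _ _ hv0 hpD, hdeg v hv0 (by omega)]
        have hqe : v ∈ pvPreds N matrix v → False := fun hc => ((pvMem_preds.mp hc).2.2.1 rfl)
        have hqe' : q ∈ pvPreds N matrix v := pvMem_preds.mpr ⟨by omega, hq, by omega, h4, he1⟩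
        have hcnt := pvCountP_extend (pvNodup_preds N matrix v) hqe'
          (P := fun u => decide (pvInDone done u v))
          (Q := fun u => decide (pvInDone (done ++ [(v, q)]) u v))
          (by
            intro u hu hne
            rw [decide_eq_decide]
            rw [pvInDone_append, pvMinMax_eq hpq]
            have : ¬((u = v ∧ v = q) ∨ (u = q ∧ v = v)) := by
              rintro (⟨rfl, rfl⟩ | ⟨rfl, _⟩)
              · omega
              · exact hne rfl
            tauto)
          (by
            have hmin : min q v = v := min_eq_right (le_of_lt hpq)
            have hmax : max q v = q := max_eq_left (le_of_lt hpq)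
            exact decide_eq_false (by simpa [pvInDone, hmin, hmax] using hnew))
          (by
            have hmin : min q v = v := min_eq_right (le_of_lt hpq)
            have hmax : max q v = q := max_eq_left (le_of_lt hpq)
            exact decide_eq_true (by simp [pvInDone, hmin, hmax]))
        rw [hcnt]; push_cast; ring
      · rw [pvGetD_set_ne _ _ _ hp hpD hv0 hvp, hdeg v hv0 hvN]
        congr 1
        apply (List.countP_congr ?_).symm
        intro u hu
        simp only [decide_eq_true_eq, pvInDone_append, pvMinMax_eq hpq]
        have : ¬((u = p ∧ v = q) ∨ (u = q ∧ v = p)) := by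
          rw [pvMem_preds] at hu
          rintro (⟨rfl, rfl⟩ | ⟨rfl, rfl⟩)
          · exact hu.2.2.2.2 h4
          · exact hvp rfl
        tauto
  -- branch 5: no 'Y' at all
  · refine ⟨hlen1, hlen2, ?_, ?_⟩
    · intro m hm0 hmN
      refine ⟨(hrows m hm0 hmN).1, pvRowChar_keep hpq ?_ (hrows m hm0 hmN).2⟩
      intro k _ _ _ hcell hcon
      rcases hcon with ⟨rfl, rfl⟩ | ⟨rfl, rfl⟩
      · exact h3 hcell
      · exact h4 hcell
    · intro v hv0 hvN
      rw [hdeg v hv0 hvN]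
      congr 1
      exact (pvDegCongr done hpq (by
        intro u v hu hcon
        rw [pvMem_preds] at hu
        rcases hcon with ⟨rfl, rfl⟩ | ⟨rfl, rfl⟩
        · exact h3 hu.2.2.2.1
        · exact h4 hu.2.2.2.1) v).symm

theorem pvAInv_foldl {N : Int} {matrix : List (List String)} (pairs : List (Int × Int)) :
    ∀ (done : List (Int × Int)) (st : List (List Int) × List Int),
    pairs.Nodup → (∀ pr ∈ pairs, 0 ≤ pr.1 ∧ pr.1 < pr.2 ∧ pr.2 < N) →
    (∀ pr ∈ pairs, pr ∉ done) → pvAInv N matrix done st →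
    pvAInv N matrix (done ++ pairs)
      (pairs.foldl (fun st pr => pvAnalysePair matrix st pr.1 pr.2) st) := by
  induction pairs with
  | nil => intro done st _ _ _ h; simpa using h
  | cons pr pairs ih =>
    intro done st hnd hvalid hfresh h
    have hv := hvalid pr List.mem_cons_self
    have hstep := pvAInv_step hv.1 hv.2.1 hv.2.2 (hfresh pr List.mem_cons_self) h
    have := ih (done ++ [(pr.1, pr.2)]) _ (List.nodup_cons.mp hnd).2
      (fun x hx => hvalid x (List.mem_cons_of_mem _ hx))
      (by
        intro x hx hmem
        rcases List.mem_append.mp hmem with hmem | hmem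
        · exact hfresh x (List.mem_cons_of_mem _ hx) hmem
        · have : x = (pr.1, pr.2) := by simpa using hmem
          subst this
          exact (List.nodup_cons.mp hnd).1 (by simpa using hx))
      hstep
    simpa [List.append_assoc] using this

def pvPairs (N : Int) : List (Int × Int) :=
  (PySem.List.pyRange 0 (N - 1) 1).flatMap
    (fun p => (PySem.List.pyRange (p + 1) N 1).map (fun q => (p, q)))

theorem pvFoldl_nested (N : Int) {γ : Type} (f : γ → Int → Int → γ) (init : γ) :
    (PySem.List.pyRange 0 (N - 1) 1).foldl
        (fun st p => (PySem.List.pyRange (p + 1) N 1).foldl (fun st q => f st p q) st) init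
      = (pvPairs N).foldl (fun st pr => f st pr.1 pr.2) init := by
  unfold pvPairs
  generalize PySem.List.pyRange 0 (N - 1) 1 = l
  induction l generalizing init with
  | nil => rfl
  | cons p l ih => simp [List.flatMap_cons, List.foldl_append, List.foldl_map, ih]

theorem pvMem_pairs {N a b : Int} : (a, b) ∈ pvPairs N ↔ 0 ≤ a ∧ a < b ∧ b < N := by
  simp only [pvPairs, List.mem_flatMap, List.mem_map, PySem.List.mem_pyRange_one]
  constructor
  · rintro ⟨p, hp, q, hq, heq⟩
    obtain ⟨rfl, rfl⟩ : p = a ∧ q = b := by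
      have h1 := congrArg Prod.fst heq
      have h2 := congrArg Prod.snd heq
      exact ⟨h1, h2⟩
    omega
  · rintro ⟨h1, h2, h3⟩
    exact ⟨a, by omega, b, by omega, rfl⟩

theorem pvNodup_pairs (N : Int) : (pvPairs N).Nodup := by
  unfold pvPairs
  rw [List.nodup_flatMap]
  constructor
  · intro p _
    exact (PySem.List.nodup_pyRange_one _ _).map (by intro q1 q2 h; simpa using h)
  · apply List.Pairwise.imp ?_ (PySem.List.pairwise_lt_pyRange_one 0 (N - 1))
    intro p1 p2 hlt
    intro pr h1 h2
    rcases List.mem_map.mp h1 with ⟨q1, _, rfl⟩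
    rcases List.mem_map.mp h2 with ⟨q2, _, heq⟩
    have : p2 = p1 := congrArg Prod.fst heq
    omega

def pvAdjChar (N : Int) (matrix : List (List String)) (adj : List (List Int)) : Prop :=
  adj.length = N.toNat ∧
  ∀ m : Int, 0 ≤ m → m < N →
    (PySem.List.pyGetD adj m []).Nodup ∧
    (∀ k : Int, k ∈ PySem.List.pyGetD adj m [] ↔
       (0 ≤ k ∧ k < N ∧ k ≠ m ∧ pvCell matrix m k = "Y"))

def pvDegChar (N : Int) (matrix : List (List String)) (degrees : List Int) : Prop :=
  degrees.length = N.toNat ∧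
  ∀ v : Int, 0 ≤ v → v < N →
    PySem.List.pyGetD degrees v 0 = (((pvPreds N matrix v).length : Nat) : Int)

theorem pvGetD_const {A : Type} (l : List A) (d : A) (h : ∀ x ∈ l, x = d) (i : Int) :
    PySem.List.pyGetD l i d = d := by
  simp only [PySem.List.pyGetD, PySem.List.pyGet?]
  cases hk : PySem.List.pyIdx? l.length i with
  | none => rfl
  | some k =>
    cases hx : l[k]? with
    | none => simp [hx]
    | some a => simp [hx, h a (List.mem_of_getElem? hx)]

theorem pvInDone_pairs {N u v : Int} (hu0 : 0 ≤ u) (huN : u < N) (hv0 : 0 ≤ v) (hvN : v < N)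
    (hne : u ≠ v) : pvInDone (pvPairs N) u v := by
  rcases lt_or_gt_of_ne hne with h | h
  · have h1 : min u v = u := min_eq_left h.le
    have h2 : max u v = v := max_eq_right h.le
    simp only [pvInDone, h1, h2]
    exact pvMem_pairs.mpr ⟨hu0, h, hvN⟩
  · have h1 : min u v = v := min_eq_right h.le
    have h2 : max u v = u := max_eq_left h.le
    simp only [pvInDone, h1, h2]
    exact pvMem_pairs.mpr ⟨hv0, h, huN⟩

theorem pvFoldl_nested' (N : Int) (matrix : List (List String))
    (init : List (List Int) × List Int) :
    (PySem.List.pyRange 0 (N - 1) 1).foldl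
        (fun st p => (PySem.List.pyRange (p + 1) N 1).foldl (fun st q => pvAnalysePair matrix st p q) st) init
      = (pvPairs N).foldl (fun st pr => pvAnalysePair matrix st pr.1 pr.2) init :=
  pvFoldl_nested N (fun st p q => pvAnalysePair matrix st p q) init

theorem pvAnalyse_spec (N : Int) (matrix : List (List String)) :
    pvDegChar N matrix (pvAnalyse N matrix).1 ∧ pvAdjChar N matrix (pvAnalyse N matrix).2 := by
  have hinit : pvAInv N matrix []
      ((PySem.List.pyRange 0 N 1).map (fun _ => (PySem.Set.empty : PySem.Set Int)),
        List.replicate N.toNat 0) := by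
    refine ⟨?_, by simp, ?_, ?_⟩
    · simp [PySem.List.length_pyRange_one]
    · intro m hm0 hmN
      have hrow : PySem.List.pyGetD
          ((PySem.List.pyRange 0 N 1).map (fun _ => (PySem.Set.empty : PySem.Set Int))) m [] = [] :=
        pvGetD_const _ _ (by intro x hx; exact ((by simpa [PySem.Set.empty] using (List.mem_map.mp hx) : (∃ y, 0 ≤ y ∧ y < N) ∧ x = [])).2) m
      rw [hrow]
      simp [pvInDone]
    · intro v hv0 hvN
      have hdeg0 : PySem.List.pyGetD (List.replicate N.toNat (0 : Int)) v 0 = 0 :=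
        pvGetD_const _ _ (by intro x hx; exact List.eq_of_mem_replicate hx) v
      rw [hdeg0]
      have : (pvPreds N matrix v).countP (fun u => decide (pvInDone [] u v)) = 0 := by
        apply List.countP_eq_zero.mpr
        intro u _
        simp [pvInDone]
      rw [this]
      simp
  have hfold := pvAInv_foldl (N := N) (matrix := matrix) (pvPairs N) [] _
    (pvNodup_pairs N)
    (by
      rintro ⟨a, b⟩ hpr
      have := pvMem_pairs.mp hpr
      exact ⟨this.1, this.2.1, this.2.2⟩)
    (by simp)
    hinit
  rw [List.nil_append] at hfold
  have heq : pvAnalyse N matrix =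
      (((pvPairs N).foldl (fun st pr => pvAnalysePair matrix st pr.1 pr.2)
          ((PySem.List.pyRange 0 N 1).map (fun _ => (PySem.Set.empty : PySem.Set Int)),
            List.replicate N.toNat 0)).2,
        ((pvPairs N).foldl (fun st pr => pvAnalysePair matrix st pr.1 pr.2)
          ((PySem.List.pyRange 0 N 1).map (fun _ => (PySem.Set.empty : PySem.Set Int)),
            List.replicate N.toNat 0)).1) := by
    simp only [pvAnalyse, pvFoldl_nested' N matrix]
  obtain ⟨hlen1, hlen2, hrows, hdeg⟩ := hfold
  rw [heq]
  constructor
  · refine ⟨hlen2, ?_⟩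
    intro v hv0 hvN
    rw [hdeg v hv0 hvN]
    congr 1
    apply List.countP_eq_length.mpr
    intro u hu
    rw [pvMem_preds] at hu
    exact decide_eq_true (pvInDone_pairs hu.1 hu.2.1 hv0 hvN hu.2.2.1)
  · refine ⟨hlen1, ?_⟩
    intro m hm0 hmN
    refine ⟨(hrows m hm0 hmN).1, ?_⟩
    intro k
    rw [(hrows m hm0 hmN).2 k]
    constructor
    · rintro ⟨k1, k2, k3, k4, _⟩; exact ⟨k1, k2, k3, k4⟩
    · rintro ⟨k1, k2, k3, k4⟩
      exact ⟨k1, k2, k3, k4, pvInDone_pairs hm0 hmN k1 k2 (fun h => k3 h.symm)⟩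

-- ---- BFS characterisation ----

def pvWinv (N : Int) (matrix : List (List String))
    (visit : List Bool) (degrees : List Int) (queue : List Int) : Prop :=
  visit.length = N.toNat ∧ degrees.length = N.toNat ∧
  queue.Nodup ∧
  (∀ i ∈ queue, 0 ≤ i ∧ i < N ∧ PySem.List.pyGetD visit i false = true) ∧
  (∀ v : Int, 0 ≤ v → v < N → PySem.List.pyGetD visit v false = true → pvReach N matrix v) ∧
  (∀ v : Int, 0 ≤ v → v < N → PySem.List.pyGetD visit v false = false →
     PySem.List.pyGetD degrees v 0 =
       (((pvPreds N matrix v).countP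
           (fun u => !(PySem.List.pyGetD visit u false) || queue.contains u) : Nat) : Int)) ∧
  (∀ v : Int, 0 ≤ v → v < N → PySem.List.pyGetD visit v false = false →
     PySem.List.pyGetD degrees v 0 = 0 → pvPreds N matrix v = [])

def pvMinv (N : Int) (matrix : List (List String)) (adj : List (List Int)) (node : Int)
    (rest : List Int) (visit : List Bool) (degrees : List Int) (queue : List Int) : Prop :=
  visit.length = N.toNat ∧ degrees.length = N.toNat ∧
  queue.Nodup ∧ node ∉ queue ∧ 0 ≤ node ∧ node < N ∧
  PySem.List.pyGetD visit node false = true ∧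
  rest.Nodup ∧ (∀ k ∈ rest, k ∈ PySem.List.pyGetD adj node []) ∧
  (∀ i ∈ queue, 0 ≤ i ∧ i < N ∧ PySem.List.pyGetD visit i false = true) ∧
  (∀ v : Int, 0 ≤ v → v < N → PySem.List.pyGetD visit v false = true → pvReach N matrix v) ∧
  (∀ v : Int, 0 ≤ v → v < N → PySem.List.pyGetD visit v false = false →
     PySem.List.pyGetD degrees v 0 =
       (((pvPreds N matrix v).countP
           (fun u => !(PySem.List.pyGetD visit u false) || queue.contains u
               || (u == node && rest.contains v)) : Nat) : Int)) ∧
  (∀ v : Int, 0 ≤ v → v < N → PySem.List.pyGetD visit v false = false →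
     PySem.List.pyGetD degrees v 0 = 0 → pvPreds N matrix v = [])

theorem pvWinv_pop {N : Int} {matrix : List (List String)} {adj : List (List Int)}
    {node : Int} {visit : List Bool} {degrees : List Int} {queue : List Int}
    (hadj : pvAdjChar N matrix adj)
    (h : pvWinv N matrix visit degrees (node :: queue)) :
    pvMinv N matrix adj node (PySem.List.pyGetD adj node []) visit degrees queue := by
  obtain ⟨hl1, hl2, hqnd, hqprop, hsound, hdegv, hzero⟩ := h
  obtain ⟨hnotmem, hqnd'⟩ := List.nodup_cons.mp hqnd
  obtain ⟨hn0, hnN, hvnode⟩ := hqprop node List.mem_cons_self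
  refine ⟨hl1, hl2, hqnd', hnotmem, hn0, hnN, hvnode,
    (hadj.2 node hn0 hnN).1, fun k hk => hk,
    fun i hi => hqprop i (List.mem_cons_of_mem _ hi), hsound, ?_, hzero⟩
  intro v hv0 hvN hvf
  rw [hdegv v hv0 hvN hvf]
  congr 1
  apply List.countP_congr
  intro u hu
  simp only [List.contains_cons]
  by_cases hun : u = node
  · have hb : (u == node) = true := beq_iff_eq.mpr hun
    have hvu : PySem.List.pyGetD visit u false = true := hun ▸ hvnode
    have hvrest : (PySem.List.pyGetD adj node []).contains v = true := by
      rw [List.contains_iff_mem, (hadj.2 node hn0 hnN).2 v]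
      have hup := pvMem_preds.mp hu
      rw [hun] at hup
      exact ⟨hv0, hvN, fun hc => hup.2.2.1 hc.symm, hup.2.2.2.1⟩
    have hnq : queue.contains node = false := by
      rcases hc : queue.contains node
      · rfl
      · exact absurd (List.contains_iff_mem.mp hc) hnotmem
    rw [hun]
    simp
    exact Or.inr (List.contains_iff_mem.mp hvrest)
  · have hb : (u == node) = false := beq_eq_false_iff_ne.mpr hun
    simp [hb]

theorem pvBfsEdge_visited {adj : List (List Int)} {node next : Int} {visit : List Bool}
    {degrees queue : List Int} (h : PySem.List.pyGetD visit next false = true) :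
    pvBfsEdge adj node (visit, degrees, queue) next = (visit, degrees, queue) := by
  simp [pvBfsEdge, h]

theorem pvBfsEdge_bidir {adj : List (List Int)} {node next : Int} {visit : List Bool}
    {degrees queue : List Int} (hv : PySem.List.pyGetD visit next false = false)
    (hc : PySem.Set.contains (PySem.List.pyGetD adj next []) node = true) :
    pvBfsEdge adj node (visit, degrees, queue) next
      = (if PySem.List.pyGetD degrees next 0 = 0
          then (PySem.List.pySetD visit next true, degrees, queue ++ [next])
          else (visit, degrees, queue)) := by
  simp [pvBfsEdge, hv, (PySem.Set.contains_iff _ _).mp hc]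

theorem pvBfsEdge_single {adj : List (List Int)} {node next : Int} {visit : List Bool}
    {degrees queue : List Int} (hv : PySem.List.pyGetD visit next false = false)
    (hc : PySem.Set.contains (PySem.List.pyGetD adj next []) node = false) :
    pvBfsEdge adj node (visit, degrees, queue) next
      = (if PySem.List.pyGetD
            (PySem.List.pySetD degrees next (PySem.List.pyGetD degrees next 0 - 1)) next 0 = 0
          then (PySem.List.pySetD visit next true,
            PySem.List.pySetD degrees next (PySem.List.pyGetD degrees next 0 - 1), queue ++ [next])
          else (visit,
            PySem.List.pySetD degrees next (PySem.List.pyGetD degrees next 0 - 1), queue)) := by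
  have hcn : node ∉ PySem.List.pyGetD adj next [] := by
    intro hm
    rw [(PySem.Set.contains_iff _ _).mpr hm] at hc
    cases hc
  simp [pvBfsEdge, hv, hcn]

set_option maxHeartbeats 2000000 in
theorem pvMinv_step {N : Int} {matrix : List (List String)} {adj : List (List Int)}
    {node next : Int} {rest : List Int} {visit : List Bool} {degrees : List Int} {queue : List Int}
    (hadj : pvAdjChar N matrix adj)
    (h : pvMinv N matrix adj node (next :: rest) visit degrees queue) :
    pvMinv N matrix adj node rest
      (pvBfsEdge adj node (visit, degrees, queue) next).1
      (pvBfsEdge adj node (visit, degrees, queue) next).2.1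
      (pvBfsEdge adj node (visit, degrees, queue) next).2.2 ∧
    (pvBfsEdge adj node (visit, degrees, queue) next).1.count false
        + (pvBfsEdge adj node (visit, degrees, queue) next).2.2.length
      ≤ visit.count false + queue.length ∧
    pvLe visit (pvBfsEdge adj node (visit, degrees, queue) next).1 := by
  obtain ⟨hl1, hl2, hqnd, hnq, hn0, hnN, hvnode, hrnd, hrmem, hqprop, hsound, hdegv, hzero⟩ := h
  have hnextadj : next ∈ PySem.List.pyGetD adj node [] := hrmem next List.mem_cons_self
  obtain ⟨hx0, hxN, hxne, hxcell⟩ := ((hadj.2 node hn0 hnN).2 next).mp hnextadj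
  obtain ⟨hnextnotin, hrnd'⟩ := List.nodup_cons.mp hrnd
  have hrmem' : ∀ k ∈ rest, k ∈ PySem.List.pyGetD adj node [] :=
    fun k hk => hrmem k (List.mem_cons_of_mem _ hk)
  have hnqb : queue.contains node = false := by
    rcases hc : queue.contains node
    · rfl
    · exact absurd (List.contains_iff_mem.mp hc) hnq
  cases hvis : PySem.List.pyGetD visit next false with
  | true =>
    have hE : pvBfsEdge adj node (visit, degrees, queue) next = (visit, degrees, queue) :=
      pvBfsEdge_visited hvis
    rw [hE]
    refine ⟨⟨hl1, hl2, hqnd, hnq, hn0, hnN, hvnode, hrnd', hrmem', hqprop, hsound, ?_, hzero⟩,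
      le_refl _, pvLe_refl _⟩
    intro v hv0 hvN hvf
    rw [hdegv v hv0 hvN hvf]
    congr 1
    apply List.countP_congr
    intro u hu
    have hvne : v ≠ next := by
      intro hc; rw [hc, hvis] at hvf; cases hvf
    simp only [List.contains_cons, List.contains_iff_mem, Bool.or_eq_true, beq_iff_eq,
      Bool.and_eq_true, Bool.not_eq_true']
    constructor <;> intro hh <;> tauto
  | false =>
    have hvfnext : next ∉ queue := fun hc => by
      have := (hqprop next hc).2.2; rw [hvis] at this; cases this
    have hnn : node ≠ next := Ne.symm hxne
    cases hcont : PySem.Set.contains (PySem.List.pyGetD adj next []) node with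
    | true =>
      -- bidirectional edge: no decrement
      have hmemA : node ∈ PySem.List.pyGetD adj next [] := (PySem.Set.contains_iff _ _).mp hcont
      have hcellYX : pvCell matrix next node = "Y" := (((hadj.2 next hx0 hxN).2 node).mp hmemA).2.2.2
      have hnodenotpred : node ∉ pvPreds N matrix next :=
        fun hc => (pvMem_preds.mp hc).2.2.2.2 hcellYX
      by_cases hdz : PySem.List.pyGetD degrees next 0 = 0
      · -- visit next, enqueue
        have hE : pvBfsEdge adj node (visit, degrees, queue) next
            = (PySem.List.pySetD visit next true, degrees, queue ++ [next]) := by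
          rw [pvBfsEdge_bidir hvis hcont, if_pos hdz]
        rw [hE]
        have hpredsnil : pvPreds N matrix next = [] := hzero next hx0 hxN hvis hdz
        have hreach : pvReach N matrix next := pvReach.mk next (by rw [hpredsnil]; simp)
        have hgself : PySem.List.pyGetD (PySem.List.pySetD visit next true) next false = true :=
          pvGetD_set_self _ _ hx0 (by omega) _ _
        have hgne : ∀ w : Int, 0 ≤ w → w ≠ next →
            PySem.List.pyGetD (PySem.List.pySetD visit next true) w false
              = PySem.List.pyGetD visit w false :=
          fun w hw hwne => pvGetD_set_ne _ _ _ hx0 (by omega) hw hwne _ _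
        refine ⟨⟨by rw [PySem.List.length_pySetD]; exact hl1, hl2, ?_, ?_, hn0, hnN, ?_,
          hrnd', hrmem', ?_, ?_, ?_, ?_⟩, ?_, pvLe_set_true visit next hx0⟩
        · exact List.nodup_append.mpr ⟨hqnd, by simp, by
            intro a ha b hb
            rw [List.mem_singleton] at hb; subst hb
            exact fun hc => hvfnext (hc ▸ ha)⟩
        · simp only [List.mem_append, List.mem_singleton]
          rintro (hc | hc)
          · exact hnq hc
          · exact hnn hc
        · rw [hgne node hn0 hnn]; exact hvnode
        · intro i hi
          rcases List.mem_append.mp hi with hi | hi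
          · obtain ⟨a, b, c⟩ := hqprop i hi
            exact ⟨a, b, pvLe_set_true visit next hx0 i c⟩
          · rw [List.mem_singleton] at hi; subst hi
            exact ⟨hx0, hxN, hgself⟩
        · intro v hv0 hvN hvt
          by_cases hvn : v = next
          · exact hvn ▸ hreach
          · exact hsound v hv0 hvN (by rw [← hgne v hv0 hvn]; exact hvt)
        · intro v hv0 hvN hvf'
          have hvne : v ≠ next := by
            intro hc; rw [hc, hgself] at hvf'; cases hvf'
          have hvf : PySem.List.pyGetD visit v false = false := by
            rw [← hgne v hv0 hvne]; exact hvf'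
          rw [hdegv v hv0 hvN hvf]
          congr 1
          apply List.countP_congr
          intro u hu
          have hu0 : 0 ≤ u := (pvMem_preds.mp hu).1
          by_cases hun : u = next
          · rw [hun]
            simp [hvis, hgself, List.contains_append]
          · rw [hgne u hu0 hun]
            simp only [List.contains_append, List.contains_cons, List.contains_nil,
              List.contains_iff_mem, Bool.or_eq_true, beq_iff_eq, Bool.and_eq_true,
              Bool.not_eq_true', Bool.or_false]
            constructor <;> intro hh <;> tauto
        · intro v hv0 hvN hvf' hd0
          have hvne : v ≠ next := by
            intro hc; rw [hc, hgself] at hvf'; cases hvf'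
          exact hzero v hv0 hvN (by rw [← hgne v hv0 hvne]; exact hvf') hd0
        · have hset : PySem.List.pySetD visit next true = visit.set next.toNat true :=
            PySem.List.pySetD_of_nonneg _ _ hx0
          have hgd : visit.getD next.toNat false = false := by
            rw [← pvGetD_nonneg visit next hx0]; exact hvis
          have := pvCountFalse_set visit next.toNat (by omega) hgd
          rw [hset]
          simp only [List.length_append, List.length_singleton]
          omega
      · -- skip: degree not zero
        have hE : pvBfsEdge adj node (visit, degrees, queue) next = (visit, degrees, queue) := by
          rw [pvBfsEdge_bidir hvis hcont, if_neg hdz]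
        rw [hE]
        refine ⟨⟨hl1, hl2, hqnd, hnq, hn0, hnN, hvnode, hrnd', hrmem', hqprop, hsound, ?_, hzero⟩,
          le_refl _, pvLe_refl _⟩
        intro v hv0 hvN hvf
        rw [hdegv v hv0 hvN hvf]
        congr 1
        apply List.countP_congr
        intro u hu
        by_cases hvne : v = next
        · subst hvne
          have hun : u ≠ node := fun hc => hnodenotpred (hc ▸ hu)
          simp only [List.contains_cons, List.contains_iff_mem, Bool.or_eq_true, beq_iff_eq,
            Bool.and_eq_true, Bool.not_eq_true']
          constructor <;> intro hh <;> tauto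
        · simp only [List.contains_cons, List.contains_iff_mem, Bool.or_eq_true, beq_iff_eq,
            Bool.and_eq_true, Bool.not_eq_true']
          constructor <;> intro hh <;> tauto
    | false =>
      -- single edge node -> next: decrement
      have hnotmemA : node ∉ PySem.List.pyGetD adj next [] := fun hc => by
        rw [← PySem.Set.contains_iff] at hc
        rw [hcont] at hc; cases hc
      have hcellnotY : pvCell matrix next node ≠ "Y" := fun hc =>
        hnotmemA (((hadj.2 next hx0 hxN).2 node).mpr ⟨hn0, hnN, hnn, hc⟩)
      have hnodepred : node ∈ pvPreds N matrix next :=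
        pvMem_preds.mpr ⟨hn0, hnN, hnn, hxcell, hcellnotY⟩
      have hrestb : rest.contains next = false := by
        rcases hc : rest.contains next
        · rfl
        · exact absurd (List.contains_iff_mem.mp hc) hnextnotin
      have hdg_self : PySem.List.pyGetD
          (PySem.List.pySetD degrees next (PySem.List.pyGetD degrees next 0 - 1)) next 0
            = PySem.List.pyGetD degrees next 0 - 1 :=
        pvGetD_set_self _ _ hx0 (by omega) _ _
      have hdg_ne : ∀ w : Int, 0 ≤ w → w ≠ next →
          PySem.List.pyGetD
            (PySem.List.pySetD degrees next (PySem.List.pyGetD degrees next 0 - 1)) w 0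
              = PySem.List.pyGetD degrees w 0 :=
        fun w hw hwne => pvGetD_set_ne _ _ _ hx0 (by omega) hw hwne _ _
      have hcntold := hdegv next hx0 hxN hvis
      have hsplit : (pvPreds N matrix next).countP
            (fun u => !PySem.List.pyGetD visit u false || queue.contains u
                || (u == node && (next :: rest).contains next))
          = (pvPreds N matrix next).countP
            (fun u => !PySem.List.pyGetD visit u false || queue.contains u
                || (u == node && rest.contains next)) + 1 := by
        apply pvCountP_extend (pvNodup_preds N matrix next) hnodepred
        · intro u _ hune
          simp [beq_eq_false_iff_ne.mpr hune]
        · simp only [hvnode, hnqb, hrestb, Bool.not_true, Bool.false_or, Bool.or_eq_false_iff,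
            Bool.and_eq_false_iff]
          simp [hnq, hnextnotin]
        · simp [hvnode, hnqb, List.contains_cons]
      have hdegnext_new : PySem.List.pyGetD
          (PySem.List.pySetD degrees next (PySem.List.pyGetD degrees next 0 - 1)) next 0
            = (((pvPreds N matrix next).countP
              (fun u => !PySem.List.pyGetD visit u false || queue.contains u
                || (u == node && rest.contains next)) : Nat) : Int) := by
        rw [hdg_self, hcntold, hsplit]; push_cast; ring
      by_cases hdz : PySem.List.pyGetD
          (PySem.List.pySetD degrees next (PySem.List.pyGetD degrees next 0 - 1)) next 0 = 0
      · -- decremented to zero: visit next, enqueue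
        have hE : pvBfsEdge adj node (visit, degrees, queue) next
            = (PySem.List.pySetD visit next true,
               PySem.List.pySetD degrees next (PySem.List.pyGetD degrees next 0 - 1),
               queue ++ [next]) := by
          rw [pvBfsEdge_single hvis hcont, if_pos hdz]
        rw [hE]
        have hcnt0 : (pvPreds N matrix next).countP
            (fun u => !PySem.List.pyGetD visit u false || queue.contains u
              || (u == node && rest.contains next)) = 0 := by
          rw [hdegnext_new] at hdz
          exact_mod_cast hdz
        have hreach : pvReach N matrix next := by
          refine pvReach.mk next ?_
          intro u hu
          have hnp := List.countP_eq_zero.mp hcnt0 u hu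
          have hvu : PySem.List.pyGetD visit u false = true := by
            rcases hc : PySem.List.pyGetD visit u false
            · exact absurd (by simp [hc] :
                (!PySem.List.pyGetD visit u false || queue.contains u
                  || (u == node && rest.contains next)) = true) (by simpa using hnp)
            · rfl
          obtain ⟨hu0, huN, _, _, _⟩ := pvMem_preds.mp hu
          exact hsound u hu0 huN hvu
        have hgself : PySem.List.pyGetD (PySem.List.pySetD visit next true) next false = true :=
          pvGetD_set_self _ _ hx0 (by omega) _ _
        have hgne : ∀ w : Int, 0 ≤ w → w ≠ next →
            PySem.List.pyGetD (PySem.List.pySetD visit next true) w false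
              = PySem.List.pyGetD visit w false :=
          fun w hw hwne => pvGetD_set_ne _ _ _ hx0 (by omega) hw hwne _ _
        refine ⟨⟨by rw [PySem.List.length_pySetD]; exact hl1,
          by rw [PySem.List.length_pySetD]; exact hl2, ?_, ?_, hn0, hnN, ?_,
          hrnd', hrmem', ?_, ?_, ?_, ?_⟩, ?_, pvLe_set_true visit next hx0⟩
        · exact List.nodup_append.mpr ⟨hqnd, by simp, by
            intro a ha b hb
            rw [List.mem_singleton] at hb; subst hb
            exact fun hc => hvfnext (hc ▸ ha)⟩
        · simp only [List.mem_append, List.mem_singleton]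
          rintro (hc | hc)
          · exact hnq hc
          · exact hnn hc
        · rw [hgne node hn0 hnn]; exact hvnode
        · intro i hi
          rcases List.mem_append.mp hi with hi | hi
          · obtain ⟨a, b, c⟩ := hqprop i hi
            exact ⟨a, b, pvLe_set_true visit next hx0 i c⟩
          · rw [List.mem_singleton] at hi; subst hi
            exact ⟨hx0, hxN, hgself⟩
        · intro v hv0 hvN hvt
          by_cases hvn : v = next
          · exact hvn ▸ hreach
          · exact hsound v hv0 hvN (by rw [← hgne v hv0 hvn]; exact hvt)
        · intro v hv0 hvN hvf'
          have hvne : v ≠ next := by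
            intro hc; rw [hc, hgself] at hvf'; cases hvf'
          have hvf : PySem.List.pyGetD visit v false = false := by
            rw [← hgne v hv0 hvne]; exact hvf'
          rw [hdg_ne v hv0 hvne, hdegv v hv0 hvN hvf]
          congr 1
          apply List.countP_congr
          intro u hu
          have hu0 : 0 ≤ u := (pvMem_preds.mp hu).1
          by_cases hun : u = next
          · rw [hun]
            simp [hvis, hgself, List.contains_append]
          · rw [hgne u hu0 hun]
            simp only [List.contains_append, List.contains_cons, List.contains_nil,
              List.contains_iff_mem, Bool.or_eq_true, beq_iff_eq, Bool.and_eq_true,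
              Bool.not_eq_true', Bool.or_false]
            constructor <;> intro hh <;> tauto
        · intro v hv0 hvN hvf' hd0
          have hvne : v ≠ next := by
            intro hc; rw [hc, hgself] at hvf'; cases hvf'
          rw [hdg_ne v hv0 hvne] at hd0
          exact hzero v hv0 hvN (by rw [← hgne v hv0 hvne]; exact hvf') hd0
        · have hset : PySem.List.pySetD visit next true = visit.set next.toNat true :=
            PySem.List.pySetD_of_nonneg _ _ hx0
          have hgd : visit.getD next.toNat false = false := by
            rw [← pvGetD_nonneg visit next hx0]; exact hvis
          have := pvCountFalse_set visit next.toNat (by omega) hgd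
          rw [hset]
          simp only [List.length_append, List.length_singleton]
          omega
      · -- decremented, still nonzero
        have hE : pvBfsEdge adj node (visit, degrees, queue) next
            = (visit,
               PySem.List.pySetD degrees next (PySem.List.pyGetD degrees next 0 - 1),
               queue) := by
          rw [pvBfsEdge_single hvis hcont, if_neg hdz]
        rw [hE]
        refine ⟨⟨hl1, by rw [PySem.List.length_pySetD]; exact hl2, hqnd, hnq, hn0, hnN, hvnode,
          hrnd', hrmem', hqprop, hsound, ?_, ?_⟩, le_refl _, pvLe_refl _⟩
        · intro v hv0 hvN hvf
          by_cases hvne : v = next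
          · rw [hvne]
            exact hdegnext_new
          · rw [hdg_ne v hv0 hvne, hdegv v hv0 hvN hvf]
            congr 1
            apply List.countP_congr
            intro u hu
            simp only [List.contains_cons, List.contains_iff_mem, Bool.or_eq_true, beq_iff_eq,
              Bool.and_eq_true, Bool.not_eq_true']
            constructor <;> intro hh <;> tauto
        · intro v hv0 hvN hvf hd0
          by_cases hvne : v = next
          · rw [hvne] at hd0
            exact absurd hd0 hdz
          · rw [hdg_ne v hv0 hvne] at hd0
            exact hzero v hv0 hvN hvf hd0

theorem pvMinv_fold {N : Int} {matrix : List (List String)} {adj : List (List Int)} {node : Int}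
    (hadj : pvAdjChar N matrix adj) :
    ∀ (rest : List Int) (visit : List Bool) (degrees : List Int) (queue : List Int),
    pvMinv N matrix adj node rest visit degrees queue →
    pvMinv N matrix adj node []
        (rest.foldl (pvBfsEdge adj node) (visit, degrees, queue)).1
        (rest.foldl (pvBfsEdge adj node) (visit, degrees, queue)).2.1
        (rest.foldl (pvBfsEdge adj node) (visit, degrees, queue)).2.2 ∧
      (rest.foldl (pvBfsEdge adj node) (visit, degrees, queue)).1.count false
          + (rest.foldl (pvBfsEdge adj node) (visit, degrees, queue)).2.2.length
        ≤ visit.count false + queue.length ∧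
      pvLe visit (rest.foldl (pvBfsEdge adj node) (visit, degrees, queue)).1 := by
  intro rest
  induction rest with
  | nil => intro visit degrees queue h; exact ⟨h, le_refl _, pvLe_refl _⟩
  | cons next rest ih =>
    intro visit degrees queue h
    obtain ⟨h1, h2, h3⟩ := pvMinv_step hadj h
    have := ih _ _ _ h1
    refine ⟨by simpa using this.1, ?_, pvLe_trans h3 (by simpa using this.2.2)⟩
    calc _ ≤ _ := by simpa using this.2.1
      _ ≤ _ := h2

theorem pvMinv_nil_Winv {N : Int} {matrix : List (List String)} {adj : List (List Int)}
    {node : Int} {visit : List Bool} {degrees : List Int} {queue : List Int}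
    (h : pvMinv N matrix adj node [] visit degrees queue) :
    pvWinv N matrix visit degrees queue := by
  obtain ⟨hl1, hl2, hqnd, _, _, _, _, _, _, hqprop, hsound, hdegv, hzero⟩ := h
  refine ⟨hl1, hl2, hqnd, hqprop, hsound, ?_, hzero⟩
  intro v hv0 hvN hvf
  rw [hdegv v hv0 hvN hvf]
  congr 1
  apply List.countP_congr
  intro u _
  simp

theorem pvBfsLoop_spec {N : Int} {matrix : List (List String)} {adj : List (List Int)}
    (hadj : pvAdjChar N matrix adj) :
    ∀ (fuel : Nat) (queue : List Int) (visit : List Bool) (degrees : List Int),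
    pvWinv N matrix visit degrees queue →
    visit.count false + queue.length ≤ fuel →
    pvWinv N matrix (pvBfsLoop adj fuel queue visit degrees).1
        (pvBfsLoop adj fuel queue visit degrees).2 [] ∧
      pvLe visit (pvBfsLoop adj fuel queue visit degrees).1 := by
  intro fuel
  induction fuel with
  | zero =>
    intro queue visit degrees hW hm
    cases queue with
    | nil => exact ⟨hW, pvLe_refl _⟩
    | cons node queue => simp [List.length_cons] at hm
  | succ fuel ih =>
    intro queue visit degrees hW hm
    cases queue with
    | nil => exact ⟨hW, pvLe_refl _⟩
    | cons node queue =>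
      have hM := pvWinv_pop hadj hW
      have hF := pvMinv_fold hadj (PySem.List.pyGetD adj node []) visit degrees queue hM
      have hW' := pvMinv_nil_Winv hF.1
      have hstep : pvBfsLoop adj (fuel + 1) (node :: queue) visit degrees
          = pvBfsLoop adj fuel
            ((PySem.List.pyGetD adj node []).foldl (pvBfsEdge adj node) (visit, degrees, queue)).2.2
            ((PySem.List.pyGetD adj node []).foldl (pvBfsEdge adj node) (visit, degrees, queue)).1
            ((PySem.List.pyGetD adj node []).foldl (pvBfsEdge adj node) (visit, degrees, queue)).2.1 := rfl
      have hm' : ((PySem.List.pyGetD adj node []).foldl (pvBfsEdge adj node) (visit, degrees, queue)).1.count false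
          + ((PySem.List.pyGetD adj node []).foldl (pvBfsEdge adj node) (visit, degrees, queue)).2.2.length ≤ fuel := by
        have h1 := hF.2.1
        have h2 : (node :: queue).length = queue.length + 1 := rfl
        omega
      have hrec := ih _ _ _ hW' hm'
      rw [hstep]
      exact ⟨hrec.1, pvLe_trans hF.2.2 hrec.2⟩

-- ---- root loop and A characterisation ----

def pvRootStep (N : Int) (adj : List (List Int)) (st : List Bool × List Int) (root : Int) :
    List Bool × List Int :=
  if PySem.List.pyGetD st.1 root false then st
  else pvBfsLoop adj (N.toNat + 1) [root] (PySem.List.pySetD st.1 root true) st.2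

theorem pvRoots_fold {N : Int} {matrix : List (List String)} {adj : List (List Int)}
    (hadj : pvAdjChar N matrix adj) :
    ∀ (roots : List Int) (visit : List Bool) (degrees : List Int),
    (∀ x ∈ roots, 0 ≤ x ∧ x < N ∧ pvPreds N matrix x = []) →
    pvWinv N matrix visit degrees [] →
    pvWinv N matrix (roots.foldl (pvRootStep N adj) (visit, degrees)).1
        (roots.foldl (pvRootStep N adj) (visit, degrees)).2 [] ∧
      (∀ x ∈ roots,
        PySem.List.pyGetD (roots.foldl (pvRootStep N adj) (visit, degrees)).1 x false = true) ∧
      pvLe visit (roots.foldl (pvRootStep N adj) (visit, degrees)).1 := by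
  intro roots
  induction roots with
  | nil =>
    intro visit degrees _ hW
    exact ⟨hW, by simp, pvLe_refl _⟩
  | cons root roots ih =>
    intro visit degrees hvalid hW
    obtain ⟨hr0, hrN, hpnil⟩ := hvalid root List.mem_cons_self
    obtain ⟨hl1, hl2, _, _, hsound, hdegv, hzero⟩ := hW
    rw [List.foldl_cons]
    by_cases hvr : PySem.List.pyGetD visit root false = true
    · have hred : pvRootStep N adj (visit, degrees) root = (visit, degrees) := by
        simp [pvRootStep, hvr]
      rw [hred]
      have hrec := ih visit degrees (fun x hx => hvalid x (List.mem_cons_of_mem _ hx))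
        ⟨hl1, hl2, by simp, by simp, hsound, hdegv, hzero⟩
      refine ⟨hrec.1, ?_, hrec.2.2⟩
      intro x hx
      rcases List.mem_cons.mp hx with rfl | hx
      · exact hrec.2.2 x hvr
      · exact hrec.2.1 x hx
    · have hvrf : PySem.List.pyGetD visit root false = false := by
        rcases hc : PySem.List.pyGetD visit root false
        · rfl
        · exact absurd hc hvr
      have hred : pvRootStep N adj (visit, degrees) root
          = pvBfsLoop adj (N.toNat + 1) [root] (PySem.List.pySetD visit root true) degrees := by
        simp [pvRootStep, hvrf]
      rw [hred]
      have hgself : PySem.List.pyGetD (PySem.List.pySetD visit root true) root false = true :=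
        pvGetD_set_self _ _ hr0 (by omega) _ _
      have hgne : ∀ w : Int, 0 ≤ w → w ≠ root →
          PySem.List.pyGetD (PySem.List.pySetD visit root true) w false
            = PySem.List.pyGetD visit w false :=
        fun w hw hwne => pvGetD_set_ne _ _ _ hr0 (by omega) hw hwne _ _
      have hreach : pvReach N matrix root := pvReach.mk root (by rw [hpnil]; simp)
      have hW1 : pvWinv N matrix (PySem.List.pySetD visit root true) degrees [root] := by
        refine ⟨by rw [PySem.List.length_pySetD]; exact hl1, hl2, by simp, ?_, ?_, ?_, ?_⟩
        · intro i hi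
          rw [List.mem_singleton] at hi; subst hi
          exact ⟨hr0, hrN, hgself⟩
        · intro v hv0 hvN hvt
          by_cases hvrr : v = root
          · exact hvrr ▸ hreach
          · exact hsound v hv0 hvN (by rw [← hgne v hv0 hvrr]; exact hvt)
        · intro v hv0 hvN hvf'
          have hvne : v ≠ root := by
            intro hc; rw [hc, hgself] at hvf'; cases hvf'
          have hvf : PySem.List.pyGetD visit v false = false := by
            rw [← hgne v hv0 hvne]; exact hvf'
          rw [hdegv v hv0 hvN hvf]
          congr 1
          apply List.countP_congr
          intro u hu
          have hu0 : 0 ≤ u := (pvMem_preds.mp hu).1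
          by_cases hur : u = root
          · rw [hur]
            simp [hvrf, hgself]
          · rw [hgne u hu0 hur]
            simp only [List.contains_nil, List.contains_cons, List.contains_iff_mem,
              Bool.or_eq_true, beq_iff_eq, Bool.not_eq_true', Bool.or_false]
            constructor <;> intro hh <;> tauto
        · intro v hv0 hvN hvf' hd0
          have hvne : v ≠ root := by
            intro hc; rw [hc, hgself] at hvf'; cases hvf'
          exact hzero v hv0 hvN (by rw [← hgne v hv0 hvne]; exact hvf') hd0
      have hmeas : (PySem.List.pySetD visit root true).count false + [root].length
          ≤ N.toNat + 1 := by
        have hset : PySem.List.pySetD visit root true = visit.set root.toNat true :=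
          PySem.List.pySetD_of_nonneg _ _ hr0
        have hgd : visit.getD root.toNat false = false := by
          rw [← pvGetD_nonneg visit root hr0]; exact hvrf
        have h1 := pvCountFalse_set visit root.toNat (by omega) hgd
        have h2 : visit.count false ≤ visit.length := List.count_le_length
        rw [hset]
        simp only [List.length_singleton]
        omega
      have hB := pvBfsLoop_spec hadj (N.toNat + 1) [root] _ _ hW1 hmeas
      have hrec := ih _ _ (fun x hx => hvalid x (List.mem_cons_of_mem _ hx)) hB.1
      refine ⟨hrec.1, ?_, ?_⟩
      · intro x hx
        rcases List.mem_cons.mp hx with rfl | hx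
        · exact hrec.2.2 x (hB.2 x hgself)
        · exact hrec.2.1 x hx
      · exact pvLe_trans (pvLe_set_true visit root hr0) (pvLe_trans hB.2 hrec.2.2)

theorem pvCount_true_iff {N : Int} (l : List Bool) (hlen : l.length = N.toNat) (hN : 0 ≤ N) :
    (((l.count true : Nat) : Int) = N ↔ ∀ v ∈ PySem.List.pyRange 0 N 1,
      PySem.List.pyGetD l v false = true) := by
  constructor
  · intro h v hv
    rcases PySem.List.mem_pyRange_one.mp hv with ⟨hv0, hvN⟩
    have hcount : l.count true = l.length := by omega
    have hall := List.count_eq_length.mp hcount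
    have hi : v.toNat < l.length := by omega
    rw [pvGetD_nonneg _ _ hv0, List.getD_eq_getElem _ _ hi]
    exact (hall _ (List.getElem_mem hi)).symm
  · intro h
    have : l.count true = l.length := by
      apply List.count_eq_length.mpr
      intro b hb
      rcases List.mem_iff_getElem.mp hb with ⟨i, hi, rfl⟩
      have hv : (i : Int) ∈ PySem.List.pyRange 0 N 1 := by
        rw [PySem.List.mem_pyRange_one]; omega
      have := h _ hv
      rw [pvGetD_nat, List.getD_eq_getElem _ _ hi] at this
      exact this.symm
    omega

theorem pvSolve_char (N : Int) (matrix : List (List String)) :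
    (solve N matrix = true ↔ (0 ≤ N ∧ ∀ v ∈ PySem.List.pyRange 0 N 1, pvReach N matrix v)) := by
  by_cases hN : 0 ≤ N
  · obtain ⟨hdeg, hadjc⟩ := pvAnalyse_spec N matrix
    have hsolve : solve N matrix =
        ((((((PySem.List.pyRange 0 N 1).filter
              (fun x => PySem.List.pyGetD (pvAnalyse N matrix).1 x 0 == 0)).foldl
            (pvRootStep N (pvAnalyse N matrix).2)
            (List.replicate N.toNat false, (pvAnalyse N matrix).1)).1.count true : Nat) : Int) == N) := rfl
    have hvfalse : ∀ w : Int, PySem.List.pyGetD (List.replicate N.toNat false) w false = false :=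
      pvGetD_const _ _ (fun x hx => List.eq_of_mem_replicate hx)
    have hW0 : pvWinv N matrix (List.replicate N.toNat false) (pvAnalyse N matrix).1 [] := by
      refine ⟨by simp, hdeg.1, by simp, by simp, ?_, ?_, ?_⟩
      · intro v _ _ hvt
        rw [hvfalse v] at hvt; cases hvt
      · intro v hv0 hvN _
        rw [hdeg.2 v hv0 hvN]
        congr 1
        symm
        apply List.countP_eq_length.mpr
        intro u _
        simp [hvfalse u]
      · intro v hv0 hvN _ hd0
        rw [hdeg.2 v hv0 hvN] at hd0
        have : (pvPreds N matrix v).length = 0 := by exact_mod_cast hd0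
        exact List.length_eq_zero_iff.mp this
    have hroots : ∀ x ∈ (PySem.List.pyRange 0 N 1).filter
        (fun x => PySem.List.pyGetD (pvAnalyse N matrix).1 x 0 == 0),
        0 ≤ x ∧ x < N ∧ pvPreds N matrix x = [] := by
      intro x hx
      obtain ⟨hxr, hxc⟩ := List.mem_filter.mp hx
      obtain ⟨hx0, hxN⟩ := PySem.List.mem_pyRange_one.mp hxr
      have hd0 : PySem.List.pyGetD (pvAnalyse N matrix).1 x 0 = 0 := beq_iff_eq.mp hxc
      rw [hdeg.2 x hx0 hxN] at hd0
      have : (pvPreds N matrix x).length = 0 := by exact_mod_cast hd0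
      exact ⟨hx0, hxN, List.length_eq_zero_iff.mp this⟩
    have hRF := pvRoots_fold hadjc _ _ _ hroots hW0
    obtain ⟨⟨hfl1, hfl2, _, _, hfsound, hfdeg, hfzero⟩, hfroots, _⟩ := hRF
    constructor
    · intro hs
      rw [hsolve] at hs
      have hcnt := beq_iff_eq.mp hs
      have hall := (pvCount_true_iff _ hfl1 hN).mp hcnt
      refine ⟨hN, fun v hv => ?_⟩
      obtain ⟨hv0, hvN⟩ := PySem.List.mem_pyRange_one.mp hv
      exact hfsound v hv0 hvN (hall v hv)
    · rintro ⟨_, hall⟩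
      rw [hsolve]
      rw [beq_iff_eq]
      apply (pvCount_true_iff _ hfl1 hN).mpr
      have hcomp : ∀ w, pvReach N matrix w → 0 ≤ w → w < N →
          PySem.List.pyGetD (((PySem.List.pyRange 0 N 1).filter
              (fun x => PySem.List.pyGetD (pvAnalyse N matrix).1 x 0 == 0)).foldl
            (pvRootStep N (pvAnalyse N matrix).2)
            (List.replicate N.toNat false, (pvAnalyse N matrix).1)).1 w false = true := by
        intro w hw
        induction hw with
        | mk w hpred ihw =>
          intro hw0 hwN
          by_contra hnv
          have hvf : PySem.List.pyGetD (((PySem.List.pyRange 0 N 1).filter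
              (fun x => PySem.List.pyGetD (pvAnalyse N matrix).1 x 0 == 0)).foldl
            (pvRootStep N (pvAnalyse N matrix).2)
            (List.replicate N.toNat false, (pvAnalyse N matrix).1)).1 w false = false := by
            rcases hc : PySem.List.pyGetD (((PySem.List.pyRange 0 N 1).filter
              (fun x => PySem.List.pyGetD (pvAnalyse N matrix).1 x 0 == 0)).foldl
              (pvRootStep N (pvAnalyse N matrix).2)
              (List.replicate N.toNat false, (pvAnalyse N matrix).1)).1 w false
            · rfl
            · exact absurd hc hnv
          by_cases hallp : ∀ u ∈ pvPreds N matrix w,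
              PySem.List.pyGetD (((PySem.List.pyRange 0 N 1).filter
                (fun x => PySem.List.pyGetD (pvAnalyse N matrix).1 x 0 == 0)).foldl
                (pvRootStep N (pvAnalyse N matrix).2)
                (List.replicate N.toNat false, (pvAnalyse N matrix).1)).1 u false = true
          · have hcnt0 : (pvPreds N matrix w).countP
                (fun u => !PySem.List.pyGetD (((PySem.List.pyRange 0 N 1).filter
                  (fun x => PySem.List.pyGetD (pvAnalyse N matrix).1 x 0 == 0)).foldl
                  (pvRootStep N (pvAnalyse N matrix).2)
                  (List.replicate N.toNat false, (pvAnalyse N matrix).1)).1 u false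
                    || List.contains [] u) = 0 :=
              List.countP_eq_zero.mpr (fun u hu => by simp [hallp u hu])
            have hdz := hfdeg w hw0 hwN hvf
            rw [hcnt0] at hdz
            have hnil := hfzero w hw0 hwN hvf (by rw [hdz]; simp)
            have hwnode : w ∈ (PySem.List.pyRange 0 N 1).filter
                (fun x => PySem.List.pyGetD (pvAnalyse N matrix).1 x 0 == 0) := by
              apply List.mem_filter.mpr
              refine ⟨PySem.List.mem_pyRange_one.mpr ⟨hw0, hwN⟩, ?_⟩
              rw [beq_iff_eq, hdeg.2 w hw0 hwN, hnil]
              simp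
            exact hnv (hfroots w hwnode)
          · push_neg at hallp
            obtain ⟨u, hu, hune⟩ := hallp
            obtain ⟨hu0, huN, _, _, _⟩ := pvMem_preds.mp hu
            exact hune (ihw u hu hu0 huN)
      intro v hv
      obtain ⟨hv0, hvN⟩ := PySem.List.mem_pyRange_one.mp hv
      exact hcomp v (hall v hv) hv0 hvN
  · have hnil : PySem.List.pyRange 0 N 1 = [] := PySem.List.pyRange_one_eq_nil (by omega)
    have hz : N.toNat = 0 := by omega
    have hfalse : solve N matrix = ((0 : Int) == N) := by
      simp [solve, hnil, hz]
    rw [hfalse]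
    constructor
    · intro h
      exact absurd (beq_iff_eq.mp h) (by omega)
    · rintro ⟨h, _⟩
      exact absurd h hN

-- ---- B characterisation ----

theorem pvBVisit_length (N : Int) (matrix : List (List String)) (x : List Bool) (v : Int) :
    (pvBVisit N matrix x v).length = x.length := by
  unfold pvBVisit
  split_ifs
  · rw [PySem.List.length_pySetD]
  · rfl

theorem pvBVisit_le (N : Int) (matrix : List (List String)) (x : List Bool) (v : Int)
    (h0 : 0 ≤ v) : pvLe x (pvBVisit N matrix x v) := by
  unfold pvBVisit
  split_ifs
  · exact pvLe_set_true x v h0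
  · exact pvLe_refl x

theorem pvBFoldl_le (N : Int) (matrix : List (List String)) :
    ∀ (l : List Int), (∀ v ∈ l, 0 ≤ v) → ∀ x : List Bool,
      pvLe x (l.foldl (pvBVisit N matrix) x) := by
  intro l
  induction l with
  | nil => intro _ x; exact pvLe_refl x
  | cons a l ih =>
    intro h x
    rw [List.foldl_cons]
    exact pvLe_trans (pvBVisit_le N matrix x a (h a List.mem_cons_self))
      (ih (fun v hv => h v (List.mem_cons_of_mem _ hv)) _)

theorem pvBFoldl_length (N : Int) (matrix : List (List String)) :
    ∀ (l : List Int) (x : List Bool), (l.foldl (pvBVisit N matrix) x).length = x.length := by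
  intro l
  induction l with
  | nil => intro x; rfl
  | cons a l ih =>
    intro x
    rw [List.foldl_cons, ih, pvBVisit_length]

theorem pvBRound_le (N : Int) (matrix : List (List String)) (x : List Bool) :
    pvLe x (pvBRound N matrix x) :=
  pvBFoldl_le N matrix _ (fun v hv => (PySem.List.mem_pyRange_one.mp hv).1) x

theorem pvBRound_length (N : Int) (matrix : List (List String)) (x : List Bool) :
    (pvBRound N matrix x).length = x.length :=
  pvBFoldl_length N matrix _ x

theorem pvBVisit_sound {N : Int} {matrix : List (List String)} {x : List Bool} {v : Int}
    (hlen : x.length = N.toNat) (hv0 : 0 ≤ v) (hvN : v < N)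
    (h : ∀ w, 0 ≤ w → w < N → PySem.List.pyGetD x w false = true → pvReach N matrix w) :
    ∀ w, 0 ≤ w → w < N → PySem.List.pyGetD (pvBVisit N matrix x v) w false = true →
      pvReach N matrix w := by
  unfold pvBVisit
  split_ifs with hc
  · intro w hw0 hwN hwt
    by_cases hwv : w = v
    · refine hwv ▸ pvReach.mk v ?_
      intro u hu
      have hcall := ((Bool.and_eq_true _ _).mp hc).2
      have hut := List.all_eq_true.mp hcall u hu
      obtain ⟨hu0, huN, _, _, _⟩ := pvMem_preds.mp hu
      exact h u hu0 huN hut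
    · rw [pvGetD_set_ne _ _ _ hv0 (by omega) hw0 hwv] at hwt
      exact h w hw0 hwN hwt
  · exact h

theorem pvBFoldl_sound {N : Int} {matrix : List (List String)} :
    ∀ (l : List Int), (∀ v ∈ l, 0 ≤ v ∧ v < N) → ∀ x : List Bool, x.length = N.toNat →
    (∀ w, 0 ≤ w → w < N → PySem.List.pyGetD x w false = true → pvReach N matrix w) →
    (∀ w, 0 ≤ w → w < N →
      PySem.List.pyGetD (l.foldl (pvBVisit N matrix) x) w false = true → pvReach N matrix w) := by
  intro l
  induction l with
  | nil => intro _ x _ h; exact h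
  | cons a l ih =>
    intro hmem x hlen h
    rw [List.foldl_cons]
    have ha := hmem a List.mem_cons_self
    exact ih (fun v hv => hmem v (List.mem_cons_of_mem _ hv)) _
      (by rw [pvBVisit_length]; exact hlen)
      (pvBVisit_sound hlen ha.1 ha.2 h)

theorem pvBIter_facts (N : Int) (matrix : List (List String)) :
    ∀ (k : Nat) (x : List Bool), x.length = N.toNat →
    (∀ w, 0 ≤ w → w < N → PySem.List.pyGetD x w false = true → pvReach N matrix w) →
    ((pvBRound N matrix)^[k] x).length = N.toNat ∧
    (∀ w, 0 ≤ w → w < N →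
      PySem.List.pyGetD ((pvBRound N matrix)^[k] x) w false = true → pvReach N matrix w) := by
  intro k
  induction k with
  | zero => intro x hlen h; exact ⟨hlen, h⟩
  | succ k ih =>
    intro x hlen h
    rw [Function.iterate_succ_apply]
    exact ih _ (by rw [pvBRound_length]; exact hlen)
      (pvBFoldl_sound _ (fun v hv => PySem.List.mem_pyRange_one.mp hv) _ hlen h)

theorem pvBFoldl_fix (N : Int) (matrix : List (List String)) :
    ∀ (l : List Int) (x : List Bool), (∀ v ∈ l, pvBVisit N matrix x v = x) →
      l.foldl (pvBVisit N matrix) x = x := by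
  intro l
  induction l with
  | nil => intro x _; rfl
  | cons a l ih =>
    intro x h
    rw [List.foldl_cons, h a List.mem_cons_self]
    exact ih x (fun v hv => h v (List.mem_cons_of_mem _ hv))

theorem pvBRound_fix_of_allTrue {N : Int} {matrix : List (List String)} {x : List Bool}
    (hall : ∀ v ∈ PySem.List.pyRange 0 N 1, PySem.List.pyGetD x v false = true) :
    pvBRound N matrix x = x := by
  apply pvBFoldl_fix
  intro v hv
  unfold pvBVisit
  simp [hall v hv]

theorem pvBIter_fix (N : Int) (matrix : List (List String)) :
    ∀ (k : Nat) (x : List Bool), x.length = N.toNat → x.count false ≤ k →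
      pvBRound N matrix ((pvBRound N matrix)^[k] x) = (pvBRound N matrix)^[k] x := by
  intro k
  induction k with
  | zero =>
    intro x hlen hc
    simp only [Function.iterate_zero, id]
    apply pvBRound_fix_of_allTrue
    intro v hv
    obtain ⟨hv0, hvN⟩ := PySem.List.mem_pyRange_one.mp hv
    have hi : v.toNat < x.length := by omega
    rw [pvGetD_nonneg _ _ hv0, List.getD_eq_getElem _ _ hi]
    have hnf : false ∉ x := by
      intro hmem
      have := List.count_pos_iff.mpr hmem
      omega
    rcases hc2 : x[v.toNat]
    · exact absurd (hc2 ▸ List.getElem_mem hi) hnf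
    · rfl
  | succ k ih =>
    intro x hlen hc
    by_cases hfix : pvBRound N matrix x = x
    · rw [Function.iterate_fixed hfix]
      exact hfix
    · rw [Function.iterate_succ_apply]
      apply ih
      · rw [pvBRound_length]; exact hlen
      · have hlt := pvLe_count_false_lt (pvBRound_length N matrix x).symm
          (pvBRound_le N matrix x) (fun h => hfix h.symm)
        omega

theorem pvBFoldl_fix_each (N : Int) (matrix : List (List String)) :
    ∀ (l : List Int) (x : List Bool), (∀ v ∈ l, 0 ≤ v) →
      l.foldl (pvBVisit N matrix) x = x → ∀ v ∈ l, pvBVisit N matrix x v = x := by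
  intro l
  induction l with
  | nil => intro x _ _ v hv; cases hv
  | cons a l ih =>
    intro x hpos hfold v hv
    rw [List.foldl_cons] at hfold
    have h1 : pvLe x (pvBVisit N matrix x a) := pvBVisit_le N matrix x a (hpos a List.mem_cons_self)
    have h2 : pvLe (pvBVisit N matrix x a) (l.foldl (pvBVisit N matrix) (pvBVisit N matrix x a)) :=
      pvBFoldl_le N matrix l (fun u hu => hpos u (List.mem_cons_of_mem _ hu)) _
    rw [hfold] at h2
    have hax : pvBVisit N matrix x a = x :=
      pvLe_antisymm (pvBVisit_length N matrix x a) h2 h1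
    rcases List.mem_cons.mp hv with rfl | hv
    · exact hax
    · exact ih x (fun u hu => hpos u (List.mem_cons_of_mem _ hu)) (by rw [hax] at hfold; exact hfold) v hv

theorem pvBFix_unvisited {N : Int} {matrix : List (List String)} {x : List Bool} {v : Int}
    (hlen : x.length = N.toNat) (hfix : pvBRound N matrix x = x)
    (hv : v ∈ PySem.List.pyRange 0 N 1) (hvf : PySem.List.pyGetD x v false = false) :
    ∃ u ∈ pvPreds N matrix v, PySem.List.pyGetD x u false = false := by
  have hstep := pvBFoldl_fix_each N matrix (PySem.List.pyRange 0 N 1) x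
    (fun u hu => (PySem.List.mem_pyRange_one.mp hu).1) hfix v hv
  by_contra hall
  push_neg at hall
  have hallt : (pvPreds N matrix v).all (fun u => PySem.List.pyGetD x u false) = true :=
    List.all_eq_true.mpr (fun u hu => by
      rcases hc : PySem.List.pyGetD x u false
      · exact absurd hc (hall u hu)
      · rfl)
  obtain ⟨hv0, hvN⟩ := PySem.List.mem_pyRange_one.mp hv
  have hset : pvBVisit N matrix x v = PySem.List.pySetD x v true := by
    unfold pvBVisit
    simp [hvf, hallt]
  rw [hset] at hstep
  have hgs := pvGetD_set_self x v hv0 (by omega) true false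
  rw [hstep, hvf] at hgs
  cases hgs

theorem pvSolveAlt_char (N : Int) (matrix : List (List String)) :
    (solve_alt N matrix = true ↔ (0 ≤ N ∧ ∀ v ∈ PySem.List.pyRange 0 N 1, pvReach N matrix v)) := by
  by_cases hN : 0 ≤ N
  · have hlenr : (PySem.List.pyRange 0 N 1).length = N.toNat := by
      rw [PySem.List.length_pyRange_one]
      omega
    have halt : solve_alt N matrix =
        (((((pvBRound N matrix)^[N.toNat] (List.replicate N.toNat false)).count true : Nat) : Int)
          == N) := by
      simp only [solve_alt]
      rw [pvFoldl_const_iterate, hlenr]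
    have hvfalse : ∀ w : Int, PySem.List.pyGetD (List.replicate N.toNat false) w false = false :=
      pvGetD_const _ _ (fun x hx => List.eq_of_mem_replicate hx)
    have hfacts := pvBIter_facts N matrix N.toNat (List.replicate N.toNat false) (by simp)
      (fun w _ _ hwt => by rw [hvfalse w] at hwt; cases hwt)
    have hfix := pvBIter_fix N matrix N.toNat (List.replicate N.toNat false) (by simp) (by simp)
    constructor
    · intro hs
      rw [halt] at hs
      have hcnt := beq_iff_eq.mp hs
      have hall := (pvCount_true_iff _ hfacts.1 hN).mp hcnt
      refine ⟨hN, fun v hv => ?_⟩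
      obtain ⟨hv0, hvN⟩ := PySem.List.mem_pyRange_one.mp hv
      exact hfacts.2 v hv0 hvN (hall v hv)
    · rintro ⟨_, hall⟩
      rw [halt, beq_iff_eq]
      apply (pvCount_true_iff _ hfacts.1 hN).mpr
      have hcomp : ∀ w, pvReach N matrix w → 0 ≤ w → w < N →
          PySem.List.pyGetD ((pvBRound N matrix)^[N.toNat] (List.replicate N.toNat false))
            w false = true := by
        intro w hw
        induction hw with
        | mk w hpred ihw =>
          intro hw0 hwN
          by_contra hnv
          have hvf : PySem.List.pyGetD
              ((pvBRound N matrix)^[N.toNat] (List.replicate N.toNat false)) w false = false := by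
            rcases hc : PySem.List.pyGetD
                ((pvBRound N matrix)^[N.toNat] (List.replicate N.toNat false)) w false
            · rfl
            · exact absurd hc hnv
          obtain ⟨u, hu, huf⟩ := pvBFix_unvisited hfacts.1 hfix
            (PySem.List.mem_pyRange_one.mpr ⟨hw0, hwN⟩) hvf
          obtain ⟨hu0, huN, _, _, _⟩ := pvMem_preds.mp hu
          have := ihw u hu hu0 huN
          rw [huf] at this
          cases this
      intro v hv
      obtain ⟨hv0, hvN⟩ := PySem.List.mem_pyRange_one.mp hv
      exact hcomp v (hall v hv) hv0 hvN
  · have hnil : PySem.List.pyRange 0 N 1 = [] := PySem.List.pyRange_one_eq_nil (by omega)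
    have hz : N.toNat = 0 := by omega
    have hfalse : solve_alt N matrix = ((0 : Int) == N) := by
      simp [solve_alt, hnil, hz]
    rw [hfalse]
    constructor
    · intro h
      exact absurd (beq_iff_eq.mp h) (by omega)
    · rintro ⟨h, _⟩
      exact absurd h hN

-- ===== VERDICT (by name: the statement is the Claim_ definition above) =====
theorem solve_spec : Claim_equal_solve := by
  intro N matrix _ _
  unfold Spec_solve
  have h := (pvSolve_char N matrix).trans (pvSolveAlt_char N matrix).symm
  exact Bool.eq_iff_iff.mpr h
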